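/- GENERATED by mk_final_copies.py from the proof of the farm's unit `start_decoder.R10` (farm:start_decoder.R10.2: Lemmas.lean) as the
   re-elaboration sweep compiled it — do not edit. -/
import Vorbis.Spec.Units.start_decoder_R10
import Vorbis.Spec.StartDecoderBTest
import Asan.CheckWalk

/-!
  Unit `start_decoder.R10` (the coupling loop 4110, 0x116233 – 0x116357 + 0x116380 – 0x116385).

  THE PURE-LOGIC HALF
  * `Pt` — the assertion of the segment at every cut point INSIDE it (the loop head 0x116351, the call returns): `BodyR10` with a
    free program counter, plus the coupling steps finished so far.
  * `OKSpan` — where the stores of the segment (and of its callees) go.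
  * `Pt.keeps`, `Pt.carry` — FRAME of `Pt` over any batch of stores inside `OKSpan`s; `Pt.fields_eq`, `Pt.log2In`, `Pt.bits_keep`.
  * `Pt.site_rec`, `Pt.site_chan`, `Pt.site_f` — the check sites (MP1, MP2, OB1); `Pt.succ`, `Pt.toR11`, `Pt.err_exit` — the exits.

  THE MACHINE-LEVEL HALF, one lemma per piece (each ends at a call return / the head):
  * `seg_entry` 0x116380 → head (k = 0);   `part1` head → 0x11635d (`AtR11`) ∨ 0x116248 (loop test, ilog, get_bits);
  * `part2a` 0x116248 → 0x11628c (magnitude stored);   `part2b` 0x11628c → 0x1162a1 (ilog, get_bits);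
  * `part3a` 0x1162a1 → 0x1162ee (angle stored, magnitude read back);   `part3b` 0x1162ee → head (k + 1) ∨ 0x113b22 (`AtERR`);
  * `seg_r10` — the composition by `ReachVia.loop` (measure `coupling_steps − r13`).
-/

open X86 X86.User Asan Vorbis Vorbis.Spec Vorbis.Spec.StartDecoder

set_option maxRecDepth 4000
set_option maxHeartbeats 4000000

namespace Vorbis.Spec.start_decoder_R10

/-- **The assertion inside segment R10**, at the program counter `pc`, with `k` coupling steps finished: `BodyR10` (the mapping
loop's invariant, `rbx = m(i)`, the record under construction at stage 10) and MP4 for the steps below `k`. -/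
structure Pt (u₀ : State) (g : Ghost) (pc : Word) (i : Nat) (A7 A7c Ai : Arena) (A : Arena × List Obj) (k : Nat) (v : State) :
    Prop where
  /-- the invariant of the mapping loop 4095 -/
  loop : MapLoop u₀ g pc i A7 A7c Ai A v
  /-- rbx = m(i) -/
  rbx : v.reg .rbx = addr (mapAt g v.mem i)
  /-- MP2, MP3, `1 ≤ coupling_steps ≤ C` of the record under construction -/
  cur : MapCur g (Since Ai A.1) v.mem i 10
  /-- the counter is at most `coupling_steps` -/
  k_le : k ≤ Mapping.coupling_steps v.mem (mapAt g v.mem i)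
  /-- MP4 for the steps below the counter -/
  coup : ∀ k' : Nat, k' < k → Mapping.CouplingOK v.mem g.f (mapAt g v.mem i) k'

/-- **Where the stores of segment R10 and of its callees go**: the stack below the steady stack pointer (return addresses, the
callees' frames), the spill slots `[R + 18H, R + 1CH)` and `[R + 30H, R + 40H)`, the bit reader's windows of `*f` (with
`error` in `[f + 136, f + 144)`), and the bytes of `chan` from step `k` on (`c` = `chan` of the record, `C` = the channels). -/
def OKSpan (g : Ghost) (c k C : Nat) (w : Span) : Prop :=
  (g.RA - 1888 ≤ w.lo ∧ w.hi ≤ g.R) ∨ (g.R + 0x18 ≤ w.lo ∧ w.hi ≤ g.R + 0x1c) ∨ (g.R + 0x30 ≤ w.lo ∧ w.hi ≤ g.R + 0x40) ∨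
    (g.f + 48 ≤ w.lo ∧ w.hi ≤ g.f + 56) ∨ (g.f + 84 ≤ w.lo ∧ w.hi ≤ g.f + 96) ∨ (g.f + 136 ≤ w.lo ∧ w.hi ≤ g.f + 144) ∨
    (g.f + 1484 ≤ w.lo ∧ w.hi ≤ g.f + 1749) ∨ (g.f + 1752 ≤ w.lo ∧ w.hi ≤ g.f + 1784) ∨
    (c + 3 * k ≤ w.lo ∧ w.hi ≤ c + 3 * C)

/-- **The numbers of the frame**: `R + 1480 = RA`, 8-aligned, inside the stack region. -/
theorem Pt.geom {u₀ : State} {g : Ghost} {pc : Word} {i : Nat} {A7 A7c Ai : Arena} {A : Arena × List Obj} {k : Nat} {v : State}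
    (h : Pt u₀ g pc i A7 A7c Ai A k v) :
    g.R + 1480 = g.RA ∧ g.R % 8 = 0 ∧ 0x700000 + 1888 ≤ g.RA ∧ g.RA + 8 ≤ 0x800000 := by
  have h1 := h.loop.frame.r_eq
  have h2 := h.loop.frame.ra
  simp only [steady, depth] at h1 h2
  omega

/-- **Where `*f` is**: a stack object of a CALLER's protected frame (above the return-address slot), or off the stack region;
above the input, below the shadow. -/
theorem Pt.f_where {u₀ : State} {g : Ghost} {pc : Word} {i : Nat} {A7 A7c Ai : Arena} {A : Arena × List Obj} {k : Nat} {v : State}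
    (h : Pt u₀ g pc i A7 A7c Ai A k v) :
    0x400000 ≤ g.f ∧ g.f + 1808 ≤ 0xC00000 ∧ (g.RA + 8 ≤ g.f ∨ g.f + 1808 ≤ 0x700000 ∨ 0x800000 ≤ g.f) := by
  have hobr := h.loop.mid.bits.OBR
  simp only [voff] at hobr
  refine ⟨hobr.1, hobr.2, ?_⟩
  obtain ⟨o, ho, h1, h2⟩ := h.loop.hand.obj
  simp only [voff] at h2
  have hsh := h.loop.frame.shadow
  have hra := h.geom
  rcases List.mem_append.mp ho with hs | hoth
  · -- an object of a caller's frame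
    unfold stackObjs at hs
    obtain ⟨bF, hbF, hin⟩ := List.mem_flatMap.mp hs
    have hbF' : bF ∈ g.frames' := List.mem_cons_of_mem _ hbF
    obtain ⟨k1, k2, _, _, _⟩ := hsh.stack.active bF hbF'
    have hg := FrameLayout.objsAt_gran k1 k2 hin
    have hc := h.loop.frame.callers bF hbF
    have e : o.gLo = o.base / 8 := rfl
    left
    omega
  · have := hsh.off o hoth
    unfold OffStack at this
    omega

/-- The region `[lo, hi)` meets no `OKSpan`. -/
def Clear (g : Ghost) (c k C lo hi : Nat) : Prop :=
  (hi ≤ g.RA - 1888 ∨ g.R ≤ lo) ∧ (hi ≤ g.R + 0x18 ∨ g.R + 0x1c ≤ lo) ∧ (hi ≤ g.R + 0x30 ∨ g.R + 0x40 ≤ lo) ∧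
    (hi ≤ g.f + 48 ∨ g.f + 56 ≤ lo) ∧ (hi ≤ g.f + 84 ∨ g.f + 96 ≤ lo) ∧ (hi ≤ g.f + 136 ∨ g.f + 144 ≤ lo) ∧
    (hi ≤ g.f + 1484 ∨ g.f + 1749 ≤ lo) ∧ (hi ≤ g.f + 1752 ∨ g.f + 1784 ≤ lo) ∧
    (hi ≤ c + 3 * k ∨ c + 3 * C ≤ lo)

/-- A region that meets no `OKSpan` is off a footprint made of `OKSpan`s. -/
theorem Clear.off {g : Ghost} {c k C lo hi : Nat} (h : Clear g c k C lo hi) {ws : List Span}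
    (hws : ∀ w, w ∈ ws → OKSpan g c k C w) : ∀ w, w ∈ ws → hi ≤ w.lo ∨ w.hi ≤ lo := by
  intro w hw
  have := hws w hw
  unfold OKSpan at this
  unfold Clear at h
  omega

/-- … and reads the same after the stores. -/
theorem Clear.eqOn {g : Ghost} {c k C lo hi : Nat} (h : Clear g c k C lo hi) {ws : List Span} {mem mem' : Mem}
    (hs : Mem.SameExcept ws mem mem') (hws : ∀ w, w ∈ ws → OKSpan g c k C w) : Mem.EqOn lo hi mem mem' :=
  hs.eqOn lo hi (h.off hws)

/-- **What the stores of segment R10 keep**, in one place: every region the assertion reads. `c`, `C` are `chan` of the record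
under construction and the number of channels, in the memory BEFORE the stores. -/
structure KeepsR10 (g : Ghost) (Ai : Arena) (A : Arena × List Obj) (c k : Nat) (mem mem' : Mem) : Prop where
  /-- the fields of `*f` that the configuration reads, `mapping_count` / `mapping` included -/
  obj : ObjEq [(0, 48), (152, 1480), (1749, 1750), (1784, 1788)] mem g.f mem' g.f
  /-- the four fields of the arena layer -/
  arena : Mem.EqOn (g.f + 112) (g.f + 136) mem mem'
  /-- every block allocated before the head of iteration `i` -/
  blocks : ∀ B, Ai.Blk B → B.Kept mem mem'
  /-- the frame constants and the loop counter `[R + 8, R + 18H)` -/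
  lowA : Mem.EqOn (g.R + 8) (g.R + 0x18) mem mem'
  /-- ONE20, Z24, `longest_floorlist` -/
  lowB : Mem.EqOn (g.R + 0x1c) (g.R + 0x30) mem mem'
  /-- the protected frame, the saved registers, the return address -/
  high : Mem.EqOn (g.R + 0x40) (g.RA + 8) mem mem'
  /-- the coupling steps below `k` -/
  chan : Mem.EqOn c (c + 3 * k) mem mem'
  /-- the table `log2_4` -/
  log2 : Mem.EqOn 0x120640 0x120650 mem mem'

/-- **The stores of segment R10 keep what the assertion reads.** -/
theorem Pt.keeps {u₀ : State} {g : Ghost} {pc : Word} {i : Nat} {A7 A7c Ai : Arena} {A : Arena × List Obj} {k : Nat} {v : State}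
    (h : Pt u₀ g pc i A7 A7c Ai A k v) {ws : List Span} {mem' : Mem} (hs : Mem.SameExcept ws v.mem mem')
    (hws : ∀ w, w ∈ ws → OKSpan g (Mapping.chan v.mem (mapAt g v.mem i)) k (nchan v.mem g.f) w) :
    KeepsR10 g Ai A (Mapping.chan v.mem (mapAt g v.mem i)) k v.mem mem' := by
  obtain ⟨hg1, hg2, hg3, hg4⟩ := h.geom
  obtain ⟨hf1, hf2, hf3⟩ := h.f_where
  have harena := h.loop.mid.arena
  have hb := harena.bounds
  have hout := h.loop.hand.objOut
  simp only [voff] at hout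
  have hC : Since Ai A.1 ⟨Mapping.chan v.mem (mapAt g v.mem i), 3 * nchan v.mem g.f⟩ := h.cur.MP2
  have hCin := arena_inside harena hC.1
  have hCoff := harena.blk_off_stack hC.1
  simp only [] at hCin hCoff
  have hkle := h.k_le
  have hsteps := h.cur.MP4_steps
  have hkC : k ≤ nchan v.mem g.f := by
    rw [nchan_def]
    omega
  generalize Mapping.chan v.mem (mapAt g v.mem i) = c at *
  generalize nchan v.mem g.f = C at *
  refine ⟨?_, ?_, ?_, ?_, ?_, ?_, ?_, ?_⟩
  · apply ObjEq.of_sameExcept hs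
    · intro w hw
      simp only [List.mem_cons, List.mem_nil_iff, or_false] at hw
      rcases hw with rfl | rfl | rfl | rfl <;> simp only [] <;> omega
    · intro w hw s hsm
      have := hws s hsm
      unfold OKSpan at this
      simp only [List.mem_cons, List.mem_nil_iff, or_false] at hw
      rcases hw with rfl | rfl | rfl | rfl <;> simp only [] <;> omega
  · apply Clear.eqOn _ hs hws
    unfold Clear
    omega
  · intro B hB
    have hBA : A.1.Blk B := hB.mono h.loop.maps.exti
    have hin := arena_inside harena hBA
    have hoff := harena.blk_off_stack hBA
    have hd := harena.old_disjoint_since h.loop.maps.exti hB hC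
    simp only [vblock] at hd
    apply Block.Kept.of_sameExcept hs
    · intro w hw
      have := hws w hw
      unfold OKSpan at this
      omega
    · omega
  · apply Clear.eqOn _ hs hws
    unfold Clear
    omega
  · apply Clear.eqOn _ hs hws
    unfold Clear
    omega
  · apply Clear.eqOn _ hs hws
    unfold Clear
    omega
  · apply Clear.eqOn _ hs hws
    unfold Clear
    omega
  · have ho := h.loop.hand.outside ⟨0x120640, 16⟩ (by
      unfold fixedBlocks globalBlocks
      simp only [List.mem_cons, true_or, or_true])
    simp only [] at ho
    apply Clear.eqOn _ hs hws
    unfold Clear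
    omega

/-- **FRAME OF THE ASSERTION `Pt`** over a batch of stores that `KeepsR10` what it reads (`Pt.keeps`: stores inside `OKSpan`s): the
same assertion at the new state `v'`, given its registers, the code span, DF / MXCSR, the untouched shadow and `Bits f` (the
reader's post, or `Bits.frame_fields`). -/
theorem Pt.carry {u₀ : State} {g : Ghost} {pc : Word} {i : Nat} {A7 A7c Ai : Arena} {A : Arena × List Obj} {k : Nat} {v : State}
    (h : Pt u₀ g pc i A7 A7c Ai A k v) {pc' : Word} {v' : State} {ws : List Span}
    (hrip : v'.rip = pc') (hrsp : v'.reg .rsp = addr g.R) (hrbp : v'.reg .rbp = addr g.f)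
    (hrbx : v'.reg .rbx = v.reg .rbx) (hcode : CodeOK u₀ v'.mem) (hinv : abiInv v')
    (hs : Mem.SameExcept ws v.mem v'.mem)
    (hws : ∀ w, w ∈ ws → OKSpan g (Mapping.chan v.mem (mapAt g v.mem i)) k (nchan v.mem g.f) w)
    (hun : ShadowUntouched v.mem v'.mem) (hbits : Bits (g.Blk A) g.len v'.mem g.f) :
    Pt u₀ g pc' i A7 A7c Ai A k v' := by
  have hk := h.keeps hs hws
  obtain ⟨hg1, hg2, hg3, hg4⟩ := h.geom
  obtain ⟨hf1, hf2, hf3⟩ := h.f_where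
  have hfr := h.loop.frame
  have hmid := h.loop.mid
  have hmaps := h.loop.maps
  have harena := hmid.arena
  -- the fields of `*f` the assertion names
  have ecount : stb_vorbis.mapping_count v'.mem g.f = stb_vorbis.mapping_count v.mem g.f := by
    simp only [vacc, voff]
    exact hk.obj.i32 464 (by decide)
  have etab : stb_vorbis.mapping v'.mem g.f = stb_vorbis.mapping v.mem g.f := by
    simp only [vacc, voff]
    exact hk.obj.u64 472 (by decide)
  have echn : stb_vorbis.channels v'.mem g.f = stb_vorbis.channels v.mem g.f := by
    simp only [vacc, voff]
    exact hk.obj.i32 4 (by decide)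
  have enc : nchan v'.mem g.f = nchan v.mem g.f := by
    rw [nchan_def, nchan_def, echn]
  have eat : ∀ j, stb_vorbis.mapping_at v'.mem g.f j = stb_vorbis.mapping_at v.mem g.f j := by
    intro j
    unfold stb_vorbis.mapping_at
    rw [etab]
  have emap : mapAt g v'.mem i = mapAt g v.mem i := eat i
  -- the mapping table is a block allocated before the head of this iteration: kept
  have htabBlk : Ai.Blk ⟨stb_vorbis.mapping v.mem g.f, Off.sizeof.Mapping * (stb_vorbis.mapping_count v.mem g.f).toNat⟩ :=
    hmaps.MP1_block.1.mono hmaps.ext7c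
  have htab := hk.blocks _ htabBlk
  have h1 := hmaps.MP1
  have hrec : ∀ j : Nat, (j : Int) < stb_vorbis.mapping_count v.mem g.f →
      (Block.mk (stb_vorbis.mapping_at v.mem g.f j) Off.sizeof.Mapping).Kept v.mem v'.mem := by
    intro j hj
    apply htab.mono
    · simp only [vacc, voff]
      omega
    · simp only [vacc, voff] at h1 hj ⊢
      omega
  have hlt := h.cur.lt
  have hreci := hrec i hlt
  have e_chan : Mapping.chan v'.mem (mapAt g v.mem i) = Mapping.chan v.mem (mapAt g v.mem i) := by
    simp only [vacc, voff, mapAt]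
    exact hreci.u64 _ (by simp only [vacc, voff]; omega) (by simp only [vacc, voff]; omega)
  have e_sub : Mapping.submaps v'.mem (mapAt g v.mem i) = Mapping.submaps v.mem (mapAt g v.mem i) := by
    simp only [vacc, voff, mapAt]
    exact hreci.u8 _ (by simp only [vacc, voff]; omega) (by simp only [vacc, voff]; omega)
  have e_steps : Mapping.coupling_steps v'.mem (mapAt g v.mem i) = Mapping.coupling_steps v.mem (mapAt g v.mem i) := by
    simp only [vacc, voff, mapAt]
    exact hreci.u16 _ (by simp only [vacc, voff]; omega) (by simp only [vacc, voff]; omega)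
  -- the frame
  have hR64 : g.RA + 8 ≤ 2 ^ 64 := by omega
  have hframe : Frame u₀ g pc' A v' := by
    refine
      { entry := hfr.entry, rip := hrip, rsp := hrsp, shadowIdx := ?_, saved_rbx := ?_, saved_rbp := ?_, saved_r12 := ?_,
        saved_r13 := ?_, saved_r14 := ?_, saved_r15 := ?_, saved_ra := ?_, code := hcode, inv := hinv,
        shadow := hfr.shadow.untouched hun, offText := hfr.offText, ext := hfr.ext, callers := hfr.callers, sh7 := ?_,
        same := ?_ }
    · rw [hk.lowA.u64 _ (by omega) (by omega) (by omega)]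
      exact hfr.shadowIdx
    · rw [hk.high.u64 _ (by omega) (by omega) hR64]
      exact hfr.saved_rbx
    · rw [hk.high.u64 _ (by omega) (by omega) hR64]
      exact hfr.saved_rbp
    · rw [hk.high.u64 _ (by omega) (by omega) hR64]
      exact hfr.saved_r12
    · rw [hk.high.u64 _ (by omega) (by omega) hR64]
      exact hfr.saved_r13
    · rw [hk.high.u64 _ (by omega) (by omega) hR64]
      exact hfr.saved_r14
    · rw [hk.high.u64 _ (by omega) (by omega) hR64]
      exact hfr.saved_r15
    · rw [hk.high.u64 _ (by omega) (by omega) hR64]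
      exact hfr.saved_ra
    · intro j hj
      have e := hk.log2.u8 (0x120640 + j) (by omega) (by omega) (by omega)
      have := hfr.sh7 j hj
      exact e.trans this
    · refine hfr.same.trans (hs.mono ?_)
      intro w hw a ha1 ha2
      have hok := hws w hw
      have hext := hfr.ext
      have hC : Since Ai A.1 ⟨Mapping.chan v.mem (mapAt g v.mem i), 3 * nchan v.mem g.f⟩ := h.cur.MP2
      have hCin := arena_inside harena hC.1
      simp only [] at hCin
      rw [hext.B, hext.L] at hCin
      unfold OKSpan at hok
      unfold footprint writes
      simp only [List.mem_cons, exists_eq_or_imp, vblock, voff, depth]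
      have e1 : (g.e.reg .rdi).toNat = g.f := rfl
      rw [e1]
      have e2 : g.RA = (g.e.reg .rsp).toNat := rfl
      rw [← e2]
      omega
  -- the point inside the section
  have hconsts : SDFrameConsts 8 v'.mem g.R := by
    have hc := hmid.consts
    refine ⟨hc.aligned, ?_, ?_, ?_, ?_⟩
    · rw [hk.lowA.u64 _ (by omega) (by omega) (by omega)]
      exact hc.shadowIdx
    · rw [hk.lowB.u32 _ (by omega) (by omega) (by omega)]
      exact hc.one20
    · intro h7
      omega
    · intro h2 h11
      rw [hk.lowB.u32 _ (by omega) (by omega) (by omega)]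
      exact hc.z24 h2 h11
  have harena' : ArenaOK A.1 A.2 v'.mem g.f := by
    apply harena.frame (by simp only [voff]; omega)
    simp only [voff]
    exact hk.arena
  have hmid' : Mid g 7 8 8 A7 A v'.mem := by
    apply hmid.frame _ _ hconsts _ hun harena' hbits
    · apply hk.obj.sub
      intro w hw
      have e1 : Mid.hi 7 = 464 := rfl
      have e2 : restFrom 8 = 480 := rfl
      simp only [Mid.winsAt, e1, e2, List.mem_cons, List.mem_nil_iff, or_false] at hw
      rcases hw with rfl | rfl | rfl | rfl | rfl | rfl
      · exact ⟨(0, 48), by simp only [List.mem_cons, true_or], by simp only []; omega, by simp only []; omega⟩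
      · exact ⟨(0, 48), by simp only [List.mem_cons, true_or], by simp only []; omega, by simp only []; omega⟩
      · exact ⟨(152, 1480), by simp only [List.mem_cons, true_or, or_true], by simp only []; omega, by simp only []; omega⟩
      · exact ⟨(152, 1480), by simp only [List.mem_cons, true_or, or_true], by simp only []; omega, by simp only []; omega⟩
      · exact ⟨(1749, 1750), by simp only [List.mem_cons, true_or, or_true], by simp only []; omega, by simp only []; omega⟩
      · exact ⟨(1784, 1788), by simp only [List.mem_cons, true_or, or_true], by simp only []; omega, by simp only []; omega⟩
    · intro B hB
      exact hk.blocks B ((hB.mono hmaps.ext7).mono hmaps.ext7c)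
    · intro _ _
      exact hk.lowB.i32 _ (by omega) (by omega) (by omega)
  -- MAPS(i)
  have hmaps' : MapTrans A7 A7c Ai A.1 v'.mem g.f i := by
    refine ⟨hmaps.ext7, hmaps.ext7c, hmaps.exti, ?_, ?_, ?_, ?_⟩
    · rw [ecount]
      exact hmaps.n_le
    · rw [ecount]
      exact hmaps.MP1
    · rw [ecount, etab]
      exact hmaps.MP1_block
    · intro i' hi'
      rw [eat i']
      have hr := hmaps.record i' hi'
      have hle := hmaps.n_le
      exact hr.frame (hk.obj.sub (by decide)) (hrec i' (by omega)) (hk.blocks _ hr.MP2.1) hr.MP2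
  -- the record under construction
  have hcur' : MapCur g (Since Ai A.1) v'.mem i 10 := by
    have hc := h.cur
    refine ⟨?_, ?_, ?_, ?_, ?_, ?_, ?_⟩
    · rw [ecount]
      exact hc.lt
    · rw [emap, e_chan, enc]
      exact hc.MP2
    · rw [emap, e_sub]
      exact hc.MP3
    · rw [emap, e_steps, echn]
      exact hc.MP4_steps
    · intro h10
      rw [emap, e_steps]
      exact hc.steps_pos h10
    · intro h11
      omega
    · intro h12
      omega
  refine ⟨⟨hframe, h.loop.hand, hmid', hrbp, ?_, ?_, hmaps'⟩, ?_, hcur', ?_, ?_⟩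
  · show v'.mem.u32 (g.R + 0x10) = i
    rw [hk.lowA.u32 _ (by omega) (by omega) (by omega)]
    exact h.loop.cnt
  · rw [ecount]
    exact h.loop.i_le
  · rw [hrbx, emap]
    exact h.rbx
  · rw [emap, e_steps]
    exact h.k_le
  · intro k' hk'
    have hC : Since Ai A.1 ⟨Mapping.chan v.mem (mapAt g v.mem i), 3 * nchan v.mem g.f⟩ := h.cur.MP2
    have hCin := arena_inside harena hC.1
    have hb := harena.bounds
    simp only [] at hCin
    have hkle := h.k_le
    have hsteps := h.cur.MP4_steps
    have hnc := nchan_def v.mem g.f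
    have := h.coup k' hk'
    unfold Mapping.CouplingOK at this ⊢
    rw [emap, echn]
    simp only [MappingChannel.magnitude, MappingChannel.angle, Mapping.chan_at, voff] at this ⊢
    rw [e_chan, hk.chan.u8 _ (by omega) (by omega) (by omega), hk.chan.u8 _ (by omega) (by omega) (by omega)]
    exact this

/-- **The numbers a walk of segment R10 needs**, as one arithmetic fact about the ghosts: the frame, `*f`, the record `m(i)`
(inside the mapping table), its `chan` block, the channels and the coupling steps. -/
theorem Pt.where_ {u₀ : State} {g : Ghost} {pc : Word} {i : Nat} {A7 A7c Ai : Arena} {A : Arena × List Obj} {k : Nat} {v : State}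
    (h : Pt u₀ g pc i A7 A7c Ai A k v) :
    (g.R + 1480 = (g.e.reg .rsp).toNat ∧ g.R % 8 = 0 ∧ 0x700000 + 1888 ≤ (g.e.reg .rsp).toNat ∧
      (g.e.reg .rsp).toNat + 8 ≤ 0x800000) ∧
    (0x400000 ≤ g.f ∧ g.f + 1808 ≤ 0xC00000 ∧
      ((g.e.reg .rsp).toNat + 8 ≤ g.f ∨ g.f + 1808 ≤ 0x700000 ∨ 0x800000 ≤ g.f)) ∧
    (0x119d40 ≤ mapAt g v.mem i ∧ mapAt g v.mem i + 56 ≤ 0xC00000 ∧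
      (mapAt g v.mem i + 56 ≤ 0x700000 ∨ 0x800000 ≤ mapAt g v.mem i) ∧
      (mapAt g v.mem i + 56 ≤ g.f ∨ g.f + 1808 ≤ mapAt g v.mem i)) ∧
    (0x119d40 ≤ Mapping.chan v.mem (mapAt g v.mem i) ∧
      Mapping.chan v.mem (mapAt g v.mem i) + 3 * nchan v.mem g.f ≤ 0xC00000 ∧
      (Mapping.chan v.mem (mapAt g v.mem i) + 3 * nchan v.mem g.f ≤ 0x700000 ∨
        0x800000 ≤ Mapping.chan v.mem (mapAt g v.mem i)) ∧
      (Mapping.chan v.mem (mapAt g v.mem i) + 3 * nchan v.mem g.f ≤ g.f ∨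
        g.f + 1808 ≤ Mapping.chan v.mem (mapAt g v.mem i)) ∧
      (Mapping.chan v.mem (mapAt g v.mem i) + 3 * nchan v.mem g.f ≤ mapAt g v.mem i ∨
        mapAt g v.mem i + 56 ≤ Mapping.chan v.mem (mapAt g v.mem i))) ∧
    (1 ≤ nchan v.mem g.f ∧ nchan v.mem g.f ≤ 16 ∧ 1 ≤ Mapping.coupling_steps v.mem (mapAt g v.mem i) ∧
      Mapping.coupling_steps v.mem (mapAt g v.mem i) ≤ nchan v.mem g.f ∧ k ≤ Mapping.coupling_steps v.mem (mapAt g v.mem i)) := by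
  have hgeo := h.geom
  have hfw := h.f_where
  have e2 : g.RA = (g.e.reg .rsp).toNat := rfl
  rw [e2] at hgeo hfw
  have harena := h.loop.mid.arena
  have hb := harena.bounds
  have htext := h.loop.hand.arenaText
  have etx : L.textHi = 0x119d40 := rfl
  rw [etx] at htext
  have hout := h.loop.hand.objOut
  simp only [voff] at hout
  have hmaps := h.loop.maps
  have hC : Since Ai A.1 ⟨Mapping.chan v.mem (mapAt g v.mem i), 3 * nchan v.mem g.f⟩ := h.cur.MP2
  have hCin := arena_inside harena hC.1
  have hCoff := harena.blk_off_stack hC.1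
  have htabBlk : Ai.Blk ⟨stb_vorbis.mapping v.mem g.f, 56 * (stb_vorbis.mapping_count v.mem g.f).toNat⟩ :=
    hmaps.MP1_block.1.mono hmaps.ext7c
  have hTin := arena_inside harena (htabBlk.mono hmaps.exti)
  have hToff := harena.blk_off_stack (htabBlk.mono hmaps.exti)
  have hd := harena.old_disjoint_since hmaps.exti htabBlk hC
  simp only [vblock] at hd
  simp only [] at hCin hCoff hTin hToff
  have hlt := h.cur.lt
  have h1 := hmaps.MP1
  have hhd := h.loop.mid.header.HD1
  have hnc := nchan_def v.mem g.f
  have hsteps := h.cur.MP4_steps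
  have hpos := h.cur.steps_pos rfl
  have hkle := h.k_le
  have em : mapAt g v.mem i = stb_vorbis.mapping v.mem g.f + 56 * i := rfl
  generalize mapAt g v.mem i = m at *
  generalize Mapping.chan v.mem m = c at *
  generalize Mapping.coupling_steps v.mem m = S at *
  generalize nchan v.mem g.f = C at *
  refine ⟨hgeo, hfw, ?_, ?_, ?_⟩
  · omega
  · omega
  · omega

/-- **The fields the code of segment R10 loads read the same after its stores**: `m(i)`, `chan`, `coupling_steps`, the channels. -/
theorem Pt.fields_eq {u₀ : State} {g : Ghost} {pc : Word} {i : Nat} {A7 A7c Ai : Arena} {A : Arena × List Obj} {k : Nat} {v : State}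
    (h : Pt u₀ g pc i A7 A7c Ai A k v) {ws : List Span} {mem' : Mem} (hs : Mem.SameExcept ws v.mem mem')
    (hws : ∀ w, w ∈ ws → OKSpan g (Mapping.chan v.mem (mapAt g v.mem i)) k (nchan v.mem g.f) w) :
    mapAt g mem' i = mapAt g v.mem i ∧
      Mapping.chan mem' (mapAt g v.mem i) = Mapping.chan v.mem (mapAt g v.mem i) ∧
      Mapping.coupling_steps mem' (mapAt g v.mem i) = Mapping.coupling_steps v.mem (mapAt g v.mem i) ∧
      nchan mem' g.f = nchan v.mem g.f ∧ mem'.u32 (g.f + 4) = v.mem.u32 (g.f + 4) := by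
  have hk := h.keeps hs hws
  obtain ⟨hf1, hf2, hf3⟩ := h.f_where
  have hmaps := h.loop.maps
  have etab : stb_vorbis.mapping mem' g.f = stb_vorbis.mapping v.mem g.f := by
    simp only [vacc, voff]
    exact hk.obj.u64 472 (by decide)
  have echn : stb_vorbis.channels mem' g.f = stb_vorbis.channels v.mem g.f := by
    simp only [vacc, voff]
    exact hk.obj.i32 4 (by decide)
  have htabBlk : Ai.Blk ⟨stb_vorbis.mapping v.mem g.f, Off.sizeof.Mapping * (stb_vorbis.mapping_count v.mem g.f).toNat⟩ :=
    hmaps.MP1_block.1.mono hmaps.ext7c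
  have htab := hk.blocks _ htabBlk
  have h1 := hmaps.MP1
  have hlt := h.cur.lt
  have hreci : (Block.mk (stb_vorbis.mapping_at v.mem g.f i) Off.sizeof.Mapping).Kept v.mem mem' := by
    apply htab.mono
    · simp only [vacc, voff]
      omega
    · simp only [vacc, voff] at h1 hlt ⊢
      omega
  refine ⟨?_, ?_, ?_, ?_, ?_⟩
  · show stb_vorbis.mapping_at mem' g.f i = stb_vorbis.mapping_at v.mem g.f i
    unfold stb_vorbis.mapping_at
    rw [etab]
  · simp only [vacc, voff, mapAt]
    exact hreci.u64 _ (by simp only [vacc, voff]; omega) (by simp only [vacc, voff]; omega)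
  · simp only [vacc, voff, mapAt]
    exact hreci.u16 _ (by simp only [vacc, voff]; omega) (by simp only [vacc, voff]; omega)
  · rw [nchan_def, nchan_def, echn]
  · exact hk.obj.u32 4 (by decide)

/-- SH7 for `log2_4` after the stores of the segment. -/
theorem Pt.log2In {u₀ : State} {g : Ghost} {pc : Word} {i : Nat} {A7 A7c Ai : Arena} {A : Arena × List Obj} {k : Nat} {v : State}
    (h : Pt u₀ g pc i A7 A7c Ai A k v) {ws : List Span} {mem' : Mem} (hs : Mem.SameExcept ws v.mem mem')
    (hws : ∀ w, w ∈ ws → OKSpan g (Mapping.chan v.mem (mapAt g v.mem i)) k (nchan v.mem g.f) w) : Log2_4In mem' := by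
  have hk := h.keeps hs hws
  intro j hj
  have e := hk.log2.u8 (0x120640 + j) (by omega) (by omega) (by omega)
  exact e.trans (h.loop.frame.sh7 j hj)

/-- `Bits f` after stores of the segment that do not go to `*f` (spills, return addresses, the bytes of `chan`). -/
theorem Pt.bits_keep {u₀ : State} {g : Ghost} {pc : Word} {i : Nat} {A7 A7c Ai : Arena} {A : Arena × List Obj} {k : Nat} {v : State}
    (h : Pt u₀ g pc i A7 A7c Ai A k v) {ws : List Span} {mem' : Mem} (hs : Mem.SameExcept ws v.mem mem')
    (hoff : ∀ w, w ∈ ws → w.hi ≤ g.f ∨ g.f + 1808 ≤ w.lo) : Bits (g.Blk A) g.len mem' g.f := by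
  apply h.loop.mid.bits.frame_fields
  apply Bits.SameFields.of_sameExcept hs
  · intro w hw
    have := hoff w hw
    omega
  · intro w hw
    have := hoff w hw
    omega
  · intro w hw
    have := hoff w hw
    omega
  · intro w hw
    have := hoff w hw
    omega

/-- The signed value of the loop counter in r13d (`k ≤ 16`), as the walker's branch hypothesis spells it. -/
theorem toInt_addr_small (k : Nat) (h : k ≤ 16) : (Word.part Width.w32 (addr k)).toInt = (k : Int) := by
  rw [part32_toInt, toNat_addr _ (by omega)]
  unfold sint32
  have e : k % 2 ^ 32 = k := Nat.mod_eq_of_lt (by omega)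
  rw [e]
  split <;> omega

/-- The signed value of `movzx eax, WORD PTR [rbx]` for a small `coupling_steps`. -/
theorem toInt_zext16_small (S : Nat) (h : S ≤ 16) : (BitVec.zeroExtend 32 (BitVec.ofNat 16 S)).toInt = (S : Int) := by
  have h1 : (BitVec.zeroExtend 32 (BitVec.ofNat 16 S)).toNat = S := by
    simp only [BitVec.toNat_setWidth, BitVec.toNat_ofNat, BitVec.zeroExtend]
    omega
  rw [BitVec.toInt_eq_toNat_cond, h1]
  split <;> omega

/-- **The entry of the segment**: `BodyR10` is `Pt` with no coupling step finished. -/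
theorem Pt.of_body {u₀ : State} {g : Ghost} {i : Nat} {A7 A7c Ai : Arena} {A : Arena × List Obj} {v : State}
    (h : BodyR10 u₀ g i A7 A7c Ai A v) : Pt u₀ g pc_R10 i A7 A7c Ai A 0 v :=
  ⟨h.loop, h.rbx, h.cur, Nat.zero_le _, fun k' hk' => absurd hk' (Nat.not_lt_zero k')⟩

/-- **The exit of the loop** (`k ≥ coupling_steps` at 0x11635d): MP4 holds for every step: `BodyR11`. -/
theorem Pt.toR11 {u₀ : State} {g : Ghost} {i : Nat} {A7 A7c Ai : Arena} {A : Arena × List Obj} {k : Nat} {v : State}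
    (h : Pt u₀ g pc_R11 i A7 A7c Ai A k v) (hk : Mapping.coupling_steps v.mem (mapAt g v.mem i) ≤ k) :
    BodyR11 u₀ g i A7 A7c Ai A v := by
  refine ⟨h.loop, h.rbx, ?_⟩
  have hc := h.cur
  refine ⟨hc.lt, hc.MP2, hc.MP3, hc.MP4_steps, ?_, ?_, ?_⟩
  · intro h10
    omega
  · intro _ k' hk'
    exact h.coup k' (by omega)
  · intro h12
    omega

/-- One more coupling step is finished (the three tests of lines 4113 – 4115 passed). -/
theorem Pt.succ {u₀ : State} {g : Ghost} {pc : Word} {i : Nat} {A7 A7c Ai : Arena} {A : Arena × List Obj} {k : Nat} {v : State}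
    (h : Pt u₀ g pc i A7 A7c Ai A k v) (hk : k < Mapping.coupling_steps v.mem (mapAt g v.mem i))
    (hc : Mapping.CouplingOK v.mem g.f (mapAt g v.mem i) k) : Pt u₀ g pc i A7 A7c Ai A (k + 1) v := by
  refine ⟨h.loop, h.rbx, h.cur, hk, ?_⟩
  intro k' hk'
  by_cases e : k' = k
  · rw [e]
    exact hc
  · exact h.coup k' (by omega)

/-- **An error exit of the segment** (`call error ; jmp 113b22`, eax = 0): SD.ERR. H2, H3 from the finished residue group, H5
from MAPS(i). -/
theorem Pt.failed {u₀ : State} {g : Ghost} {pc : Word} {i : Nat} {A7 A7c Ai : Arena} {A : Arena × List Obj} {k : Nat} {v : State}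
    (h : Pt u₀ g pc i A7 A7c Ai A k v) : Failed g.len g.f (g.Live A) A v.mem := by
  have h5 : H5 (g.Blk A) v.mem g.f :=
    H5.mono (MappingDeinitOK.h5 h.loop.maps.upTo.deinit h.loop.maps.MP1.2) (fun _ hB => runBlk_setup hB)
  exact h.loop.mid.failed (by omega) (h.loop.mid.h2_done (by omega)) (h.loop.mid.h3_done (by omega)) h5

/-- The exit assertion `AtERR` with eax = 0 from the assertion at the epilogue's address. -/
theorem Pt.toERR {u₀ : State} {g : Ghost} {i : Nat} {A7 A7c Ai : Arena} {A : Arena × List Obj} {k : Nat} {v : State}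
    (h : Pt u₀ g pc_ERR i A7 A7c Ai A k v) (hax : (v.reg .rax).toNat % 2 ^ 32 = 0) : AtERR u₀ g v :=
  ⟨A, h.loop.frame, h.loop.hand, Or.inl ⟨hax, h.failed⟩⟩

/-! ### The machine-level half: entry → head; head → exit R11 ∨ the first `get_bits` return -/

/-- **The entry of the segment** (0x116380 … 0x116351, stb_vorbis_fixed.c:4110 `k = 0`): `mov r13d, [rsp+0x24] ; jmp head`. The slot
`[R + 24H]` is gcc's literal 0 (Z24). From `BodyR10` to the assertion `Pt` at the loop head with `k = 0`. -/
theorem seg_entry (Lay : Layout) (hLay : Lay.hi = 0x1000000) (μ : Microarch) (hμ : UserX.MicroOK μ) (u₀ : State)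
    (hcode : HasCodeNat Lay u₀ Vorbis.L.start_decoder.entry Vorbis.Code.code_start_decoder.nat Vorbis.L.start_decoder.size)
    (g : Ghost) (i : Nat) (A7 A7c Ai : Arena) (A : Arena × List Obj) (v : State)
    (hat : BodyR10 u₀ g i A7 A7c Ai A v) :
    ReachVia Lay μ WayInv v (fun w => Pt u₀ g Vorbis.L.start_decoder.loop37 i A7 A7c Ai A 0 w ∧ w.reg .r13 = addr 0) := by
  have hpt := Pt.of_body hat
  have hf := hpt.loop.frame
  have he := hf.entry
  v_entry he
  simp only [depth] at he_room he_stack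
  obtain ⟨⟨hR, hR8, hRlo, hRhi⟩, _⟩ := hpt.where_
  have w_rip := hf.rip
  have e_rsp : v.reg .rsp = g.e.reg .rsp - 1480 := by
    rw [hf.rsp]
    apply UInt64.toNat_inj.mp
    rw [toNat_addr _ (by omega)]
    u_omega
  have e_rbp := hpt.loop.rbp
  have w_eq : Mem.EqOn Vorbis.L.textLo Vorbis.L.textHi u₀.mem v.mem := hf.code
  have hdf : v.flags .df = false := (show abiInv _ from hf.inv).1
  have hmx : v.mxcsr &&& 0x1F80 = 0x1F80 := (show abiInv _ from hf.inv).2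
  have hsse := Vorbis.sseOK_of_abiInv hf.inv
  -- Z24: the dword at [R + 24H] is 0
  have r_z24 : v.mem.readLE (g.e.reg .rsp - 1444) 4 = 0 := by
    have hz := hpt.loop.mid.consts.z24 (by omega) (by omega)
    have ea : g.e.reg .rsp - 1444 = addr (g.R + 0x24) := by
      apply UInt64.toNat_inj.mp
      rw [toNat_addr _ (by omega)]
      u_omega
    rw [ea]
    exact hz
  u_walk hcode [hμ.vendor] until [Vorbis.L.start_decoder.loop37] span [Vorbis.L.textLo, Vorbis.L.textHi] side (v_side)
  have hpt' : Pt u₀ g Vorbis.L.start_decoder.loop37 i A7 A7c Ai A 0 s_116385 := by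
    apply hpt.carry (ws := []) w_rip _ _ _ w_eq _ _ _ _ _
    · rw [w_kept .rsp rfl]
      exact hf.rsp
    · rw [w_kept .rbp rfl]
      exact e_rbp
    · exact w_kept .rbx rfl
    · refine abiInv_of ?_ ?_
      · rw [w_flags]
        exact hdf
      · rw [w_mxcsr]
        exact hmx
    · rw [w_mem]
      exact Mem.SameExcept.refl _ _
    · intro w hw
      exact absurd hw (List.not_mem_nil)
    · rw [w_mem]
      exact Mem.EqOn.refl _ _ _
    · rw [w_mem]
      exact hpt.loop.mid.bits
  refine ReachVia.done ⟨hpt', ?_⟩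
  rw [w_r13]
  rfl

/-- **Part 1 of one round of the coupling loop** (0x116351 … 0x116248, stb_vorbis_fixed.c:4110 – 4111): the loop test
`movzx eax, WORD PTR [rbx] ; cmp eax, r13d ; jg`, then `ilog(f->channels - 1)` and the first `get_bits`. From the assertion `Pt`
at the loop head with `r13d = k` to the exit `AtR11` (`k ≥ coupling_steps`, 0x11635d) or to `Pt` after the return of `get_bits`
(0x116248) with `k < coupling_steps`. -/
theorem part1 (Lay : Layout) (hLay : Lay.hi = 0x1000000) (μ : Microarch) (hμ : UserX.MicroOK μ) (u₀ : State)
    (hcode : HasCodeNat Lay u₀ Vorbis.L.start_decoder.entry Vorbis.Code.code_start_decoder.nat Vorbis.L.start_decoder.size)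
    (h_ilog : ∀ (others : List Obj) (frames : List (Nat × FrameLayout)), Calls Lay μ Vorbis.WayInv (Vorbis.conv u₀) Vorbis.L.ilog.entry (Vorbis.Spec.ilog.spec others frames))
    (h_get_bits : ∀ (others : List Obj) (frames : List (Nat × FrameLayout)) (Blk : Block → Prop) (len : Nat), Calls Lay μ Vorbis.WayInv (Vorbis.conv u₀) Vorbis.L.get_bits.entry (Vorbis.Spec.get_bits.spec others frames Blk len))
    (g : Ghost) (i : Nat) (A7 A7c Ai : Arena) (A : Arena × List Obj) (k : Nat) (v : State)
    (hpt : Pt u₀ g Vorbis.L.start_decoder.loop37 i A7 A7c Ai A k v) (hr13 : v.reg .r13 = addr k) :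
    ReachVia Lay μ WayInv v (fun w => AtR11 u₀ g i w ∨
      (Pt u₀ g Vorbis.L.start_decoder.cut290 i A7 A7c Ai A k w ∧ w.reg .r13 = addr k ∧
        k < Mapping.coupling_steps w.mem (mapAt g w.mem i) ∧
        Mapping.coupling_steps w.mem (mapAt g w.mem i) = Mapping.coupling_steps v.mem (mapAt g v.mem i))) := by
  have hf := hpt.loop.frame
  have he := hf.entry
  v_entry he
  simp only [depth] at he_room he_stack
  obtain ⟨⟨hR, hR8, hRlo, hRhi⟩, ⟨hf1, hf2, hf3⟩, ⟨hm1, hm2, hm3, hm4⟩, ⟨hc1, hc2, hc3, hc4, hc5⟩, hC1, hC16, hS1, hSC, hkS⟩ :=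
    hpt.where_
  have hilog := h_ilog A.2 g.frames'
  have hgb := h_get_bits A.2 g.frames' (g.Blk A) g.len
  have e_rbx := hpt.rbx
  have r_steps : v.mem.readLE (addr (mapAt g v.mem i)) 2 = Mapping.coupling_steps v.mem (mapAt g v.mem i) := by
    simp only [vacc, voff, Mem.u16, Nat.add_zero]
  obtain ⟨m, em⟩ : ∃ m, mapAt g v.mem i = m := ⟨_, rfl⟩
  rw [em] at hm1 hm2 hm3 hm4 hc1 hc2 hc3 hc4 hc5 hS1 hSC hkS e_rbx r_steps
  obtain ⟨c, ec⟩ : ∃ c, Mapping.chan v.mem m = c := ⟨_, rfl⟩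
  rw [ec] at hc1 hc2 hc3 hc4 hc5
  obtain ⟨S, eS⟩ : ∃ S, Mapping.coupling_steps v.mem m = S := ⟨_, rfl⟩
  rw [eS] at hS1 hSC hkS r_steps
  obtain ⟨C, eC⟩ : ∃ C, nchan v.mem g.f = C := ⟨_, rfl⟩
  rw [eC] at hc2 hc3 hc4 hc5 hC1 hC16 hSC
  have w_rip := hf.rip
  have e_rsp : v.reg .rsp = g.e.reg .rsp - 1480 := by
    rw [hf.rsp]
    apply UInt64.toNat_inj.mp
    rw [toNat_addr _ (by omega)]
    u_omega
  have e_rbp := hpt.loop.rbp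
  have e_r13 := hr13
  have r_chan : v.mem.readLE (addr g.f + 4) 4 = v.mem.u32 (g.f + 4) := by
    unfold Mem.u32
    rw [← addr_add_lit]
  have tf : (addr g.f).toNat = g.f := toNat_addr _ (by omega)
  have tm : (addr m).toNat = m := toNat_addr _ (by omega)
  have tk : (addr k).toNat = k := toNat_addr _ (by omega)
  have hasF : Lay.Has (addr g.f) 1808 := by
    apply has_addr Lay _ _ (by omega)
    · unfold Layout.lo
      omega
    · rw [hLay]
      omega
  have hasM : Lay.Has (addr m) 56 := by
    apply has_addr Lay _ _ (by omega)
    · unfold Layout.lo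
      omega
    · rw [hLay]
      omega
  have w_eq : Mem.EqOn Vorbis.L.textLo Vorbis.L.textHi u₀.mem v.mem := hf.code
  have hdf : v.flags .df = false := (show abiInv _ from hf.inv).1
  have hmx : v.mxcsr &&& 0x1F80 = 0x1F80 := (show abiInv _ from hf.inv).2
  have hsse := Vorbis.sseOK_of_abiInv hf.inv
  u_walk hcode [hμ.vendor] until [Vorbis.L.start_decoder.cut290, Vorbis.L.start_decoder.cut297] span [Vorbis.L.textLo, Vorbis.L.textHi] side (v_side)
  · -- call_inv of ilog
    v_inv
  · -- pre of ilog
    have hun : ShadowUntouched v.mem s_116239.mem := by v_untouched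
    refine ⟨shadowPre_call hf ?_ hun, hpt.loop.hand.g_log2⟩
    rw [w_rsp]
    u_omega
  · v_after_call w_rsp_116239 w_mem_116239
    -- the stores so far: the return address of the call
    have hs1 : Mem.SameExcept [⟨(g.e.reg .rsp).toNat - 1888, (g.e.reg .rsp).toNat - 1480⟩] v.mem s_116239.mem := by
      rw [w_mem_116239]
      u_same
    have hws1 : ∀ w, w ∈ [(⟨(g.e.reg .rsp).toNat - 1888, (g.e.reg .rsp).toNat - 1480⟩ : Span)] →
        OKSpan g (Mapping.chan v.mem (mapAt g v.mem i)) k (nchan v.mem g.f) w := by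
      intro w hw
      rw [List.mem_singleton.mp hw]
      unfold OKSpan
      left
      show g.RA - 1888 ≤ (g.e.reg .rsp).toNat - 1888 ∧ (g.e.reg .rsp).toNat - 1480 ≤ g.R
      have e2 : g.RA = (g.e.reg .rsp).toNat := rfl
      omega
    -- the result of ilog: at most 31
    obtain ⟨z, w_rax⟩ : ∃ z, s_116239r.reg .rax = z := ⟨_, rfl⟩
    have hz : z.toNat ≤ 31 := by
      have hp := w_post.2.2 (hpt.log2In hs1 hws1)
      rw [w_rax] at hp
      rw [hp]
      apply ilogVal_le_of_lt
      · have := (Word.part .w32 (s_116239.reg .rdi)).toInt_lt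
        simpa using this
      · have := (Word.part .w32 (s_116239.reg .rdi)).toInt_lt
        simpa using this
    clear w_post
    u_walk hcode [hμ.vendor] until [Vorbis.L.start_decoder.cut290, Vorbis.L.start_decoder.cut297] span [Vorbis.L.textLo, Vorbis.L.textHi] side (v_side)
    · -- call_inv of get_bits
      v_inv
    · -- pre of get_bits: `ReaderPre`, n ≤ 32
      have hs2 : Mem.SameExcept [⟨(g.e.reg .rsp).toNat - 1888, (g.e.reg .rsp).toNat - 1480⟩] v.mem s_116243.mem := by
        rw [w_mem]
        u_same
      have hun : ShadowUntouched v.mem s_116243.mem := by v_untouched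
      refine ⟨⟨shadowPre_call hf ?_ hun, ?_, ?_⟩, ?_⟩
      · rw [w_rsp]
        u_omega
      · rw [w_rdi, tf]
        exact readerEnv_mid hpt.loop.hand hpt.loop.mid
      · rw [w_rdi, tf]
        apply hpt.bits_keep hs2
        intro w hw
        rw [List.mem_singleton.mp hw]
        simp only []
        omega
      · rw [bitsArg_def, w_rsi, Vorbis.toNat_ofBV32, Vorbis.toNat_part32]
        omega
    · -- after get_bits: the assertion at 0x116248
      v_after_call w_rsp_116243 w_mem_116243
      simp only [w_rdi_116243, tf] at w_same
      have hs3 : Mem.SameExcept [⟨(g.e.reg .rsp).toNat - 1888, (g.e.reg .rsp).toNat - 1480⟩,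
          ⟨g.f + 48, g.f + 56⟩, ⟨g.f + 84, g.f + 96⟩, ⟨g.f + 136, g.f + 144⟩, ⟨g.f + 1484, g.f + 1749⟩,
          ⟨g.f + 1752, g.f + 1784⟩] v.mem s_116243r.mem := by
        u_same
      have hws3 : ∀ w, w ∈ [(⟨(g.e.reg .rsp).toNat - 1888, (g.e.reg .rsp).toNat - 1480⟩ : Span),
          ⟨g.f + 48, g.f + 56⟩, ⟨g.f + 84, g.f + 96⟩, ⟨g.f + 136, g.f + 144⟩, ⟨g.f + 1484, g.f + 1749⟩,
          ⟨g.f + 1752, g.f + 1784⟩] → OKSpan g (Mapping.chan v.mem (mapAt g v.mem i)) k (nchan v.mem g.f) w := by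
        intro w hw
        have e2 : g.RA = (g.e.reg .rsp).toNat := rfl
        simp only [List.mem_cons, List.mem_nil_iff, or_false] at hw
        unfold OKSpan
        rcases hw with rfl | rfl | rfl | rfl | rfl | rfl <;> simp only [] <;> omega
      have hun3 : ShadowUntouched v.mem s_116243r.mem := by v_untouched
      have hbits3 : Bits (g.Blk A) g.len s_116243r.mem g.f := by
        have hb := w_post.bits.bits
        rw [w_rdi_116243, tf] at hb
        exact hb
      have hpt3 : Pt u₀ g Vorbis.L.start_decoder.cut290 i A7 A7c Ai A k s_116243r := by
        apply hpt.carry w_rip _ _ _ w_eq (abiInv_of w_df w_mx) hs3 hws3 hun3 hbits3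
        · rw [w_rsp, ← e_rsp]
          exact hf.rsp
        · rw [w_kept .rbp rfl]
          exact e_rbp
        · exact w_kept .rbx rfl
      obtain ⟨q1, q2, q3, q4, q5⟩ := hpt.fields_eq hs3 hws3
      refine ReachVia.done (Or.inr ⟨hpt3, ?_, ?_, ?_⟩)
      · rw [w_kept .r13 rfl]
        exact e_r13
      · rw [q1, q3, em, eS]
        rw [toInt_addr_small k (by omega), toInt_zext16_small S (by omega)] at hbr_116357
        omega
      · rw [q1, q3]
  · -- the exit arm: k ≥ coupling_steps, 0x11635d
    have hdf' : s_116357.flags .df = false := by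
      rw [w_flags]
      simp only [X86.User.df_setStatus]
      exact hdf
    have hmx' : s_116357.mxcsr &&& 0x1F80 = 0x1F80 := by
      rw [w_mxcsr]
      exact hmx
    have hpt' : Pt u₀ g pc_R11 i A7 A7c Ai A k s_116357 := by
      apply hpt.carry (ws := []) w_rip _ _ _ w_eq (abiInv_of hdf' hmx') _ _ _ _
      · rw [w_kept .rsp rfl]
        exact hf.rsp
      · rw [w_kept .rbp rfl]
        exact e_rbp
      · exact w_kept .rbx rfl
      · rw [w_mem]
        exact Mem.SameExcept.refl _ _
      · intro w hw
        exact absurd hw (List.not_mem_nil)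
      · rw [w_mem]
        exact Mem.EqOn.refl _ _ _
      · rw [w_mem]
        exact hpt.loop.mid.bits
    refine ReachVia.done (Or.inl ⟨A7, A7c, Ai, A, hpt'.toR11 ?_⟩)
    rw [w_mem, em, eS]
    rw [toInt_addr_small k (by omega), toInt_zext16_small S (by omega)] at hbr_116357
    omega

/-! ### The rest of one round of the loop: 0x116248 … the head with `k + 1`, in four walks -/

/-- `coupling_steps` of the record under construction, read in the memory of `w`. -/
def stepsOf (g : Ghost) (i : Nat) (w : State) : Nat := Mapping.coupling_steps w.mem (mapAt g w.mem i)

/-- A check site inside the record `m(i)` under construction (MP1: the mapping table is a live block). -/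
theorem Pt.site_rec {u₀ : State} {g : Ghost} {pc : Word} {i : Nat} {A7 A7c Ai : Arena} {A : Arena × List Obj} {k : Nat} {v : State}
    (h : Pt u₀ g pc i A7 A7c Ai A k v) (off n : Nat) (hoff : off + n ≤ 56) (hn : 1 ≤ n) :
    Site (Live (stackObjs g.frames' ++ A.2)) (mapAt g v.mem i + off) n := by
  have hL : BlkLive A.1.Blk (g.Live A) := h.loop.mid.env.live.sub (fun B hB => runBlk_setup hB)
  exact h.loop.maps.upTo.site_record hL h.cur.lt off n (by simp only [voff]; omega) hn rfl

/-- A check site inside the `chan` block of the record under construction (MP2), channel `j < C`, byte `off < 3`. -/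
theorem Pt.site_chan {u₀ : State} {g : Ghost} {pc : Word} {i : Nat} {A7 A7c Ai : Arena} {A : Arena × List Obj} {k : Nat} {v : State}
    (h : Pt u₀ g pc i A7 A7c Ai A k v) (j off : Nat) (hj : j < nchan v.mem g.f) (hoff : off < 3) :
    Site (Live (stackObjs g.frames' ++ A.2)) (Mapping.chan v.mem (mapAt g v.mem i) + 3 * j + off) 1 := by
  have hL : BlkLive A.1.Blk (g.Live A) := h.loop.mid.env.live.sub (fun B hB => runBlk_setup hB)
  have hC : Since Ai A.1 ⟨Mapping.chan v.mem (mapAt g v.mem i), 3 * nchan v.mem g.f⟩ := h.cur.MP2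
  apply Site.of_blk hL hC.1
  · simp only []
    omega
  · simp only []
    omega
  · exact Nat.le_refl 1

/-- A check site inside `*f` (OB1). -/
theorem Pt.site_f {u₀ : State} {g : Ghost} {pc : Word} {i : Nat} {A7 A7c Ai : Arena} {A : Arena × List Obj} {k : Nat} {v : State}
    (h : Pt u₀ g pc i A7 A7c Ai A k v) (off n : Nat) (ho : off + n ≤ 1808) (hn : 1 ≤ n) :
    Site (Live (stackObjs g.frames' ++ A.2)) (g.f + off) n :=
  h.loop.mid.bits.site_field h.loop.mid.env.live off n ho hn rfl

/-- **The assertion of one round of the coupling loop** at the program counter `pc`: `Pt`, the counter `k` in r13d, below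
`coupling_steps = S` (the ghost `S` is the same for the whole loop). -/
structure Round (u₀ : State) (g : Ghost) (pc : Word) (i : Nat) (A7 A7c Ai : Arena) (A : Arena × List Obj) (k S : Nat) (w : State) :
    Prop where
  /-- the assertion of the segment -/
  pt : Pt u₀ g pc i A7 A7c Ai A k w
  /-- r13d = k -/
  r13 : w.reg .r13 = addr k
  /-- the loop test passed -/
  lt : k < S
  /-- `coupling_steps` of the record is the ghost `S` -/
  steps : stepsOf g i w = S

/-- **The spills of one round**: `r12 = 3k` (the offset of `chan[k]`), qword `[R + 30H] = &m->chan`, qword `[R + 38H] = &f->channels`. -/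
structure Spills (g : Ghost) (i k : Nat) (w : State) : Prop where
  /-- r12 = 3k -/
  r12 : w.reg .r12 = addr (3 * k)
  /-- qword `[R + 30H]` = m + 8 -/
  s30 : UInt64.ofNat (w.mem.readLE (g.e.reg .rsp - 1432) 8) = addr (mapAt g w.mem i) + 8
  /-- qword `[R + 38H]` = f + 4 -/
  s38 : UInt64.ofNat (w.mem.readLE (g.e.reg .rsp - 1424) 8) = addr g.f + 4

/-- **Part 2a of one round** (0x116248 … 0x11628c, stb_vorbis_fixed.c:4111): the result of `get_bits` is spilled to `[R + 18H]`,
`&m->chan` to `[R + 30H]`; `chan[k].magnitude` is stored (check sites: load8 `m + 8`, store1 `chan + 3k`); `&f->channels` is spilled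
to `[R + 38H]` and checked (load4 `f + 4`). From `Round` at the return of the first `get_bits` to `Round` at the return of that check,
with the spills. -/
theorem part2a (Lay : Layout) (hLay : Lay.hi = 0x1000000) (μ : Microarch) (hμ : UserX.MicroOK μ) (u₀ : State)
    (hcode : HasCodeNat Lay u₀ Vorbis.L.start_decoder.entry Vorbis.Code.code_start_decoder.nat Vorbis.L.start_decoder.size)
    (h_load8 : Asan.SmallCheck Lay μ Vorbis.WayInv (Vorbis.CodeOK u₀) [.rax, .rcx, .rdx] 8 Vorbis.L.__asan_load8_noabort.entry)
    (h_store1 : Asan.SmallCheck Lay μ Vorbis.WayInv (Vorbis.CodeOK u₀) [.rax, .rdx] 1 Vorbis.L.__asan_store1_noabort.entry)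
    (h_load4 : Asan.SmallCheck Lay μ Vorbis.WayInv (Vorbis.CodeOK u₀) [.rax, .rcx, .rdx] 4 Vorbis.L.__asan_load4_noabort.entry)
    (g : Ghost) (i : Nat) (A7 A7c Ai : Arena) (A : Arena × List Obj) (k : Nat) (v : State)
    (S : Nat) (hrd : Round u₀ g Vorbis.L.start_decoder.cut290 i A7 A7c Ai A k S v) :
    ReachVia Lay μ WayInv v (fun w => Round u₀ g Vorbis.L.start_decoder.ret477 i A7 A7c Ai A k S w ∧ Spills g i k w) := by
  obtain ⟨hpt, hr13, hlt, hsteps⟩ := hrd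
  have hf := hpt.loop.frame
  have he := hf.entry
  v_entry he
  simp only [depth] at he_room he_stack
  obtain ⟨⟨hR, hR8, hRlo, hRhi⟩, ⟨hf1, hf2, hf3⟩, ⟨hm1, hm2, hm3, hm4⟩, ⟨hc1, hc2, hc3, hc4, hc5⟩, hC1, hC16, hS1, hSC, hkS⟩ :=
    hpt.where_
  unfold stepsOf at hsteps
  have e_rbx := hpt.rbx
  have r_chan8 : UInt64.ofNat (v.mem.readLE (addr (mapAt g v.mem i) + 8) 8) = addr (Mapping.chan v.mem (mapAt g v.mem i)) := by
    simp only [vacc, voff, Mem.u64, addr_add_lit]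
    rfl
  obtain ⟨m, em⟩ : ∃ m, mapAt g v.mem i = m := ⟨_, rfl⟩
  rw [em] at hm1 hm2 hm3 hm4 hc1 hc2 hc3 hc4 hc5 hS1 hSC hkS e_rbx r_chan8 hsteps
  obtain ⟨c, ec⟩ : ∃ c, Mapping.chan v.mem m = c := ⟨_, rfl⟩
  rw [ec] at hc1 hc2 hc3 hc4 hc5 r_chan8
  have eS := hsteps
  rw [eS] at hS1 hSC hkS
  obtain ⟨C, eC⟩ : ∃ C, nchan v.mem g.f = C := ⟨_, rfl⟩
  rw [eC] at hc2 hc3 hc4 hc5 hC1 hC16 hSC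
  have w_rip := hf.rip
  have e_rsp : v.reg .rsp = g.e.reg .rsp - 1480 := by
    rw [hf.rsp]
    apply UInt64.toNat_inj.mp
    rw [toNat_addr _ (by omega)]
    u_omega
  have e_rbp := hpt.loop.rbp
  have e_r13 := hr13
  have hk3 : addr k * 3 = addr (3 * k) := by
    unfold addr
    rw [Nat.mul_comm, UInt64.ofNat_mul]
    rfl
  have hsx : Word.ofBV (BitVec.signExtend 64 (Word.part .w32 (addr k))) = addr k := cnt32_sext k (by omega)
  have t3 : (addr (3 * k + c)).toNat = 3 * k + c := toNat_addr _ (by omega)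
  have r_chan : v.mem.readLE (addr g.f + 4) 4 = v.mem.u32 (g.f + 4) := by
    unfold Mem.u32
    rw [← addr_add_lit]
  have tf : (addr g.f).toNat = g.f := toNat_addr _ (by omega)
  have tm : (addr m).toNat = m := toNat_addr _ (by omega)
  have tc : (addr c).toNat = c := toNat_addr _ (by omega)
  have tk : (addr k).toNat = k := toNat_addr _ (by omega)
  have hasF : Lay.Has (addr g.f) 1808 := by
    apply has_addr Lay _ _ (by omega)
    · unfold Layout.lo
      omega
    · rw [hLay]
      omega
  have hasM : Lay.Has (addr m) 56 := by
    apply has_addr Lay _ _ (by omega)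
    · unfold Layout.lo
      omega
    · rw [hLay]
      omega
  have w_eq : Mem.EqOn Vorbis.L.textLo Vorbis.L.textHi u₀.mem v.mem := hf.code
  have hdf : v.flags .df = false := (show abiInv _ from hf.inv).1
  have hmx : v.mxcsr &&& 0x1F80 = 0x1F80 := (show abiInv _ from hf.inv).2
  have hsse := Vorbis.sseOK_of_abiInv hf.inv
  u_walk hcode [hμ.vendor, hsx, hk3, addr_add_addr] until [Vorbis.L.start_decoder.ret477] span [Vorbis.L.textLo, Vorbis.L.textHi] side (v_side)
  · -- 0x116258: the check of `m->chan` (load8 at m + 8): inside the record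
    have hun : ShadowUntouched v.mem s_116258.mem := by v_untouched
    have hs := hpt.site_rec 8 8 (by omega) (by omega)
    rw [em] at hs
    exact Vorbis.Spec.check_site hf.shadow hun hs (by u_omega)
  · -- 0x11626e: the check of the store `chan[k].magnitude` (store1 at chan + 3k)
    have hun : ShadowUntouched v.mem s_11626e.mem := by v_untouched
    have hs := hpt.site_chan k 0 (by omega) (by omega)
    rw [em, ec] at hs
    exact Vorbis.Spec.check_site hf.shadow hun hs (by u_omega)
  · -- 0x116287: the check of `f->channels` (load4 at f + 4)
    have hun : ShadowUntouched v.mem s_116287.mem := by v_untouched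
    have hs := hpt.site_f 4 4 (by omega) (by omega)
    exact Vorbis.Spec.check_site hf.shadow hun hs (by u_omega)
  · -- 0x11628c: the assertion after the stores (the spills, the pushed return addresses, the byte `chan[k].magnitude`)
    have hs : Mem.SameExcept [⟨(g.e.reg .rsp).toNat - 1488, (g.e.reg .rsp).toNat - 1480⟩,
        ⟨(g.e.reg .rsp).toNat - 1456, (g.e.reg .rsp).toNat - 1452⟩,
        ⟨(g.e.reg .rsp).toNat - 1432, (g.e.reg .rsp).toNat - 1416⟩,
        ⟨3 * k + c, 3 * k + c + 1⟩] v.mem s_116287r.mem := by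
      rw [w_mem]
      u_same
    have hws : ∀ w, w ∈ [(⟨(g.e.reg .rsp).toNat - 1488, (g.e.reg .rsp).toNat - 1480⟩ : Span),
        ⟨(g.e.reg .rsp).toNat - 1456, (g.e.reg .rsp).toNat - 1452⟩,
        ⟨(g.e.reg .rsp).toNat - 1432, (g.e.reg .rsp).toNat - 1416⟩,
        ⟨3 * k + c, 3 * k + c + 1⟩] → OKSpan g (Mapping.chan v.mem (mapAt g v.mem i)) k (nchan v.mem g.f) w := by
      intro w hw
      have e2 : g.RA = (g.e.reg .rsp).toNat := rfl
      rw [em, ec, eC]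
      simp only [List.mem_cons, List.mem_nil_iff, or_false] at hw
      unfold OKSpan
      rcases hw with rfl | rfl | rfl | rfl <;> simp only [] <;> omega
    have hun : ShadowUntouched v.mem s_116287r.mem := by v_untouched
    have hbits : Bits (g.Blk A) g.len s_116287r.mem g.f := by
      apply hpt.bits_keep hs
      intro w hw
      simp only [List.mem_cons, List.mem_nil_iff, or_false] at hw
      rcases hw with rfl | rfl | rfl | rfl <;> simp only [] <;> omega
    have hmx' : s_116287r.mxcsr &&& 0x1F80 = 0x1F80 := by
      rw [w_mxcsr]
      exact hmx
    have hpt' : Pt u₀ g Vorbis.L.start_decoder.ret477 i A7 A7c Ai A k s_116287r := by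
      apply hpt.carry w_rip _ _ _ w_eq (abiInv_of w_df_116287 hmx') hs hws hun hbits
      · rw [w_rsp, ← e_rsp]
        exact hf.rsp
      · rw [w_kept .rbp rfl]
        exact e_rbp
      · exact w_kept .rbx rfl
    obtain ⟨q1, q2, q3, q4, q5⟩ := hpt.fields_eq hs hws
    refine ReachVia.done ⟨⟨hpt', ?_, hlt, ?_⟩, ⟨w_r12, ?_, ?_⟩⟩
    · rw [w_kept .r13 rfl]
      exact e_r13
    · unfold stepsOf
      rw [q1, q3, em]
      exact hsteps
    · rw [q1, em]
      u_resolve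
    · u_resolve

/-- **Part 2b of one round** (0x11628c … 0x1162a1, stb_vorbis_fixed.c:4112): `ilog(f->channels - 1)` and the second `get_bits`.
The spills are kept (r12 is callee-saved; the two slots lie above the callees' frames). -/
theorem part2b (Lay : Layout) (hLay : Lay.hi = 0x1000000) (μ : Microarch) (hμ : UserX.MicroOK μ) (u₀ : State)
    (hcode : HasCodeNat Lay u₀ Vorbis.L.start_decoder.entry Vorbis.Code.code_start_decoder.nat Vorbis.L.start_decoder.size)
    (h_ilog : ∀ (others : List Obj) (frames : List (Nat × FrameLayout)), Calls Lay μ Vorbis.WayInv (Vorbis.conv u₀) Vorbis.L.ilog.entry (Vorbis.Spec.ilog.spec others frames))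
    (h_get_bits : ∀ (others : List Obj) (frames : List (Nat × FrameLayout)) (Blk : Block → Prop) (len : Nat), Calls Lay μ Vorbis.WayInv (Vorbis.conv u₀) Vorbis.L.get_bits.entry (Vorbis.Spec.get_bits.spec others frames Blk len))
    (g : Ghost) (i : Nat) (A7 A7c Ai : Arena) (A : Arena × List Obj) (k : Nat) (v : State)
    (S : Nat) (hrd : Round u₀ g Vorbis.L.start_decoder.ret477 i A7 A7c Ai A k S v) (hsp : Spills g i k v) :
    ReachVia Lay μ WayInv v (fun w => Round u₀ g Vorbis.L.start_decoder.cut292 i A7 A7c Ai A k S w ∧ Spills g i k w) := by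
  obtain ⟨hpt, hr13, hlt, hsteps⟩ := hrd
  obtain ⟨hr12, h30, h38⟩ := hsp
  have hf := hpt.loop.frame
  have he := hf.entry
  v_entry he
  simp only [depth] at he_room he_stack
  obtain ⟨⟨hR, hR8, hRlo, hRhi⟩, ⟨hf1, hf2, hf3⟩, ⟨hm1, hm2, hm3, hm4⟩, ⟨hc1, hc2, hc3, hc4, hc5⟩, hC1, hC16, hS1, hSC, hkS⟩ :=
    hpt.where_
  have hilog := h_ilog A.2 g.frames'
  have hgb := h_get_bits A.2 g.frames' (g.Blk A) g.len
  have w_rip := hf.rip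
  have e_rsp : v.reg .rsp = g.e.reg .rsp - 1480 := by
    rw [hf.rsp]
    apply UInt64.toNat_inj.mp
    rw [toNat_addr _ (by omega)]
    u_omega
  have e_rbp := hpt.loop.rbp
  have r_chan : v.mem.readLE (addr g.f + 4) 4 = v.mem.u32 (g.f + 4) := by
    unfold Mem.u32
    rw [← addr_add_lit]
  have tf : (addr g.f).toNat = g.f := toNat_addr _ (by omega)
  have hasF : Lay.Has (addr g.f) 1808 := by
    apply has_addr Lay _ _ (by omega)
    · unfold Layout.lo
      omega
    · rw [hLay]
      omega
  have w_eq : Mem.EqOn Vorbis.L.textLo Vorbis.L.textHi u₀.mem v.mem := hf.code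
  have hdf : v.flags .df = false := (show abiInv _ from hf.inv).1
  have hmx : v.mxcsr &&& 0x1F80 = 0x1F80 := (show abiInv _ from hf.inv).2
  have hsse := Vorbis.sseOK_of_abiInv hf.inv
  u_walk hcode [hμ.vendor] until [Vorbis.L.start_decoder.cut292] span [Vorbis.L.textLo, Vorbis.L.textHi] side (v_side)
  · -- call_inv of ilog
    v_inv
  · -- pre of ilog
    have hun : ShadowUntouched v.mem s_116292.mem := by v_untouched
    refine ⟨shadowPre_call hf ?_ hun, hpt.loop.hand.g_log2⟩
    rw [w_rsp]
    u_omega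
  · v_after_call w_rsp_116292 w_mem_116292
    -- the stores so far: the return address of the call
    have hs1 : Mem.SameExcept [⟨(g.e.reg .rsp).toNat - 1888, (g.e.reg .rsp).toNat - 1480⟩] v.mem s_116292.mem := by
      rw [w_mem_116292]
      u_same
    have hws1 : ∀ w, w ∈ [(⟨(g.e.reg .rsp).toNat - 1888, (g.e.reg .rsp).toNat - 1480⟩ : Span)] →
        OKSpan g (Mapping.chan v.mem (mapAt g v.mem i)) k (nchan v.mem g.f) w := by
      intro w hw
      rw [List.mem_singleton.mp hw]
      unfold OKSpan
      left
      show g.RA - 1888 ≤ (g.e.reg .rsp).toNat - 1888 ∧ (g.e.reg .rsp).toNat - 1480 ≤ g.R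
      have e2 : g.RA = (g.e.reg .rsp).toNat := rfl
      omega
    -- the result of ilog: at most 31
    obtain ⟨z, w_rax⟩ : ∃ z, s_116292r.reg .rax = z := ⟨_, rfl⟩
    have hz : z.toNat ≤ 31 := by
      have hp := w_post.2.2 (hpt.log2In hs1 hws1)
      rw [w_rax] at hp
      rw [hp]
      apply ilogVal_le_of_lt
      · have := (Word.part .w32 (s_116292.reg .rdi)).toInt_lt
        simpa using this
      · have := (Word.part .w32 (s_116292.reg .rdi)).toInt_lt
        simpa using this
    clear w_post
    u_walk hcode [hμ.vendor] until [Vorbis.L.start_decoder.cut292] span [Vorbis.L.textLo, Vorbis.L.textHi] side (v_side)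
    · -- call_inv of get_bits
      v_inv
    · -- pre of get_bits: `ReaderPre`, n ≤ 32
      have hs2 : Mem.SameExcept [⟨(g.e.reg .rsp).toNat - 1888, (g.e.reg .rsp).toNat - 1480⟩] v.mem s_11629c.mem := by
        rw [w_mem]
        u_same
      have hun : ShadowUntouched v.mem s_11629c.mem := by v_untouched
      refine ⟨⟨shadowPre_call hf ?_ hun, ?_, ?_⟩, ?_⟩
      · rw [w_rsp]
        u_omega
      · rw [w_rdi, tf]
        exact readerEnv_mid hpt.loop.hand hpt.loop.mid
      · rw [w_rdi, tf]
        apply hpt.bits_keep hs2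
        intro w hw
        rw [List.mem_singleton.mp hw]
        simp only []
        omega
      · rw [bitsArg_def, w_rsi, Vorbis.toNat_ofBV32, Vorbis.toNat_part32]
        omega
    · -- after get_bits: the assertion at 0x1162a1
      v_after_call w_rsp_11629c w_mem_11629c
      simp only [w_rdi_11629c, tf] at w_same
      have hs3 : Mem.SameExcept [⟨(g.e.reg .rsp).toNat - 1888, (g.e.reg .rsp).toNat - 1480⟩,
          ⟨g.f + 48, g.f + 56⟩, ⟨g.f + 84, g.f + 96⟩, ⟨g.f + 136, g.f + 144⟩, ⟨g.f + 1484, g.f + 1749⟩,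
          ⟨g.f + 1752, g.f + 1784⟩] v.mem s_11629cr.mem := by
        u_same
      have hws3 : ∀ w, w ∈ [(⟨(g.e.reg .rsp).toNat - 1888, (g.e.reg .rsp).toNat - 1480⟩ : Span),
          ⟨g.f + 48, g.f + 56⟩, ⟨g.f + 84, g.f + 96⟩, ⟨g.f + 136, g.f + 144⟩, ⟨g.f + 1484, g.f + 1749⟩,
          ⟨g.f + 1752, g.f + 1784⟩] → OKSpan g (Mapping.chan v.mem (mapAt g v.mem i)) k (nchan v.mem g.f) w := by
        intro w hw
        have e2 : g.RA = (g.e.reg .rsp).toNat := rfl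
        simp only [List.mem_cons, List.mem_nil_iff, or_false] at hw
        unfold OKSpan
        rcases hw with rfl | rfl | rfl | rfl | rfl | rfl <;> simp only [] <;> omega
      have hun3 : ShadowUntouched v.mem s_11629cr.mem := by v_untouched
      have hbits3 : Bits (g.Blk A) g.len s_11629cr.mem g.f := by
        have hb := w_post.bits.bits
        rw [w_rdi_11629c, tf] at hb
        exact hb
      have hpt3 : Pt u₀ g Vorbis.L.start_decoder.cut292 i A7 A7c Ai A k s_11629cr := by
        apply hpt.carry w_rip _ _ _ w_eq (abiInv_of w_df w_mx) hs3 hws3 hun3 hbits3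
        · rw [w_rsp, ← e_rsp]
          exact hf.rsp
        · rw [w_kept .rbp rfl]
          exact e_rbp
        · exact w_kept .rbx rfl
      obtain ⟨q1, q2, q3, q4, q5⟩ := hpt.fields_eq hs3 hws3
      refine ReachVia.done ⟨⟨hpt3, ?_, hlt, ?_⟩, ⟨?_, ?_, ?_⟩⟩
      · rw [w_kept .r13 rfl]
        exact hr13
      · unfold stepsOf at hsteps ⊢
        rw [q1, q3]
        exact hsteps
      · rw [w_kept .r12 rfl]
        exact hr12
      · rw [q1]
        u_frame h30
      · u_frame h38

/-- **The spills of the three tests** (lines 4113 – 4115) at 0x1162ee: `r12 = &chan[k]`, and the magnitude `mg` (the byte at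
`chan + 3k`) in the byte `[R + 18H]` and the dword `[R + 30H]`. -/
structure Tests (g : Ghost) (i k mg : Nat) (w : State) : Prop where
  /-- r12 = chan + 3k -/
  r12 : w.reg .r12 = addr (3 * k + Mapping.chan w.mem (mapAt g w.mem i))
  /-- the magnitude -/
  mag : w.mem.readLE (addr (3 * k + Mapping.chan w.mem (mapAt g w.mem i))) 1 = mg
  /-- a byte -/
  lt : mg < 256
  /-- byte `[R + 18H]` = the magnitude -/
  s18 : w.mem.readLE (g.e.reg .rsp - 1456) 1 = mg
  /-- dword `[R + 30H]` = the magnitude -/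
  s30 : w.mem.readLE (g.e.reg .rsp - 1432) 4 = mg

/-- A byte survives `movzx` and the truncation to `dl`. -/
theorem byte_round (mg : Nat) (h : mg < 256) :
    (BitVec.setWidth 8 (BitVec.zeroExtend 32 (BitVec.ofNat 8 mg))).toNat = mg ∧
      (BitVec.zeroExtend 32 (BitVec.setWidth 8 (BitVec.zeroExtend 32 (BitVec.ofNat 8 mg)))).toNat = mg := by
  simp only [BitVec.zeroExtend, BitVec.toNat_setWidth, BitVec.toNat_ofNat]
  omega

/-- **Part 3a of one round** (0x1162a1 … 0x1162ee, stb_vorbis_fixed.c:4112 – 4113): `chan[k].angle` is stored (check sites: load8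
`m + 8` through the spilled `&m->chan`, store1 `chan + 3k + 1`), the magnitude is read back (load1 `chan + 3k`) and spilled to the
byte `[R + 18H]` and the dword `[R + 30H]`; `f->channels` is checked through the spilled `&f->channels` (load4). -/
theorem part3a (Lay : Layout) (hLay : Lay.hi = 0x1000000) (μ : Microarch) (hμ : UserX.MicroOK μ) (u₀ : State)
    (hcode : HasCodeNat Lay u₀ Vorbis.L.start_decoder.entry Vorbis.Code.code_start_decoder.nat Vorbis.L.start_decoder.size)
    (h_load8 : Asan.SmallCheck Lay μ Vorbis.WayInv (Vorbis.CodeOK u₀) [.rax, .rcx, .rdx] 8 Vorbis.L.__asan_load8_noabort.entry)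
    (h_store1 : Asan.SmallCheck Lay μ Vorbis.WayInv (Vorbis.CodeOK u₀) [.rax, .rdx] 1 Vorbis.L.__asan_store1_noabort.entry)
    (h_load4 : Asan.SmallCheck Lay μ Vorbis.WayInv (Vorbis.CodeOK u₀) [.rax, .rcx, .rdx] 4 Vorbis.L.__asan_load4_noabort.entry)
    (h_load1 : Asan.SmallCheck Lay μ Vorbis.WayInv (Vorbis.CodeOK u₀) [.rax, .rdx] 1 Vorbis.L.__asan_load1_noabort.entry)
    (g : Ghost) (i : Nat) (A7 A7c Ai : Arena) (A : Arena × List Obj) (k : Nat) (v : State)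
    (S : Nat) (hrd : Round u₀ g Vorbis.L.start_decoder.cut292 i A7 A7c Ai A k S v) (hsp : Spills g i k v) :
    ReachVia Lay μ WayInv v (fun w => Round u₀ g Vorbis.L.start_decoder.ret483 i A7 A7c Ai A k S w ∧ ∃ mg, Tests g i k mg w) := by
  obtain ⟨hpt, hr13, hlt, hsteps⟩ := hrd
  obtain ⟨hr12, h30, h38⟩ := hsp
  have hf := hpt.loop.frame
  have he := hf.entry
  v_entry he
  simp only [depth] at he_room he_stack
  obtain ⟨⟨hR, hR8, hRlo, hRhi⟩, ⟨hf1, hf2, hf3⟩, ⟨hm1, hm2, hm3, hm4⟩, ⟨hc1, hc2, hc3, hc4, hc5⟩, hC1, hC16, hS1, hSC, hkS⟩ :=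
    hpt.where_
  unfold stepsOf at hsteps
  have e_rbx := hpt.rbx
  have r_chan8 : UInt64.ofNat (v.mem.readLE (addr (mapAt g v.mem i) + 8) 8) = addr (Mapping.chan v.mem (mapAt g v.mem i)) := by
    simp only [vacc, voff, Mem.u64, addr_add_lit]
    rfl
  obtain ⟨m, em⟩ : ∃ m, mapAt g v.mem i = m := ⟨_, rfl⟩
  rw [em] at hm1 hm2 hm3 hm4 hc1 hc2 hc3 hc4 hc5 hS1 hSC hkS e_rbx r_chan8 hsteps h30
  obtain ⟨c, ec⟩ : ∃ c, Mapping.chan v.mem m = c := ⟨_, rfl⟩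
  rw [ec] at hc1 hc2 hc3 hc4 hc5 r_chan8
  have eS := hsteps
  rw [eS] at hS1 hSC hkS
  obtain ⟨C, eC⟩ : ∃ C, nchan v.mem g.f = C := ⟨_, rfl⟩
  rw [eC] at hc2 hc3 hc4 hc5 hC1 hC16 hSC
  obtain ⟨mg, emg⟩ : ∃ mg, v.mem.readLE (addr (3 * k + c)) 1 = mg := ⟨_, rfl⟩
  have w_rip := hf.rip
  have e_rsp : v.reg .rsp = g.e.reg .rsp - 1480 := by
    rw [hf.rsp]
    apply UInt64.toNat_inj.mp
    rw [toNat_addr _ (by omega)]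
    u_omega
  have e_rbp := hpt.loop.rbp
  have e_r13 := hr13
  have e_r12 := hr12
  have t3 : (addr (3 * k + c)).toNat = 3 * k + c := toNat_addr _ (by omega)
  have r_chan : v.mem.readLE (addr g.f + 4) 4 = v.mem.u32 (g.f + 4) := by
    unfold Mem.u32
    rw [← addr_add_lit]
  have tf : (addr g.f).toNat = g.f := toNat_addr _ (by omega)
  have tm : (addr m).toNat = m := toNat_addr _ (by omega)
  have tc : (addr c).toNat = c := toNat_addr _ (by omega)
  have tk : (addr k).toNat = k := toNat_addr _ (by omega)
  have hasF : Lay.Has (addr g.f) 1808 := by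
    apply has_addr Lay _ _ (by omega)
    · unfold Layout.lo
      omega
    · rw [hLay]
      omega
  have hasM : Lay.Has (addr m) 56 := by
    apply has_addr Lay _ _ (by omega)
    · unfold Layout.lo
      omega
    · rw [hLay]
      omega
  have w_eq : Mem.EqOn Vorbis.L.textLo Vorbis.L.textHi u₀.mem v.mem := hf.code
  have hdf : v.flags .df = false := (show abiInv _ from hf.inv).1
  have hmx : v.mxcsr &&& 0x1F80 = 0x1F80 := (show abiInv _ from hf.inv).2
  have hsse := Vorbis.sseOK_of_abiInv hf.inv
  u_walk hcode [hμ.vendor, addr_add_addr] until [Vorbis.L.start_decoder.ret483] span [Vorbis.L.textLo, Vorbis.L.textHi] side (v_side)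
  · -- 0x1162aa: the check of `m->chan` (load8 at m + 8): inside the record
    have hun : ShadowUntouched v.mem s_1162aa.mem := by v_untouched
    have hs := hpt.site_rec 8 8 (by omega) (by omega)
    rw [em] at hs
    exact Vorbis.Spec.check_site hf.shadow hun hs (by u_omega)
  · -- 0x1162ba: the check of the store `chan[k].angle` (store1 at chan + 3k + 1)
    have hun : ShadowUntouched v.mem s_1162ba.mem := by v_untouched
    have hs := hpt.site_chan k 1 (by omega) (by omega)
    rw [em, ec] at hs
    exact Vorbis.Spec.check_site hf.shadow hun hs (by u_omega)
  · -- 0x1162cf: the check of the load `chan[k].magnitude` (load1 at chan + 3k)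
    have hun : ShadowUntouched v.mem s_1162cf.mem := by v_untouched
    have hs := hpt.site_chan k 0 (by omega) (by omega)
    rw [em, ec] at hs
    exact Vorbis.Spec.check_site hf.shadow hun hs (by u_omega)
  · -- 0x1162e9: the check of `f->channels` (load4 at the spilled `&f->channels` = f + 4)
    have hrd : s_1162e9.reg .rdi = addr g.f + 4 := by
      rw [w_rdi]
      have x1 : (addr (3 * k + c) + 1).toNat = 3 * k + c + 1 := by u_omega
      have x2 : (g.e.reg .rsp - 1424).toNat = (g.e.reg .rsp).toNat - 1424 := by u_omega
      have x3 : (addr (3 * k + c) + 1).toNat + 1 ≤ (g.e.reg .rsp - 1424).toNat ∨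
          (g.e.reg .rsp - 1424).toNat + 8 ≤ (addr (3 * k + c) + 1).toNat := by
        rw [x1, x2]
        omega
      clear w_mem
      u_frame h38
    rw [← w_rdi, hrd]
    have hun : ShadowUntouched v.mem s_1162e9.mem := by v_untouched
    have hs := hpt.site_f 4 4 (by omega) (by omega)
    exact Vorbis.Spec.check_site hf.shadow hun hs (by u_omega)
  · -- 0x1162ee: the assertion after the stores (the spills, the pushed return addresses, the byte `chan[k].angle`)
    have hs : Mem.SameExcept [⟨(g.e.reg .rsp).toNat - 1488, (g.e.reg .rsp).toNat - 1480⟩,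
        ⟨(g.e.reg .rsp).toNat - 1456, (g.e.reg .rsp).toNat - 1452⟩,
        ⟨(g.e.reg .rsp).toNat - 1432, (g.e.reg .rsp).toNat - 1428⟩,
        ⟨3 * k + c + 1, 3 * k + c + 2⟩] v.mem s_1162e9r.mem := by
      rw [w_mem]
      u_same
    have hws : ∀ w, w ∈ [(⟨(g.e.reg .rsp).toNat - 1488, (g.e.reg .rsp).toNat - 1480⟩ : Span),
        ⟨(g.e.reg .rsp).toNat - 1456, (g.e.reg .rsp).toNat - 1452⟩,
        ⟨(g.e.reg .rsp).toNat - 1432, (g.e.reg .rsp).toNat - 1428⟩,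
        ⟨3 * k + c + 1, 3 * k + c + 2⟩] → OKSpan g (Mapping.chan v.mem (mapAt g v.mem i)) k (nchan v.mem g.f) w := by
      intro w hw
      have e2 : g.RA = (g.e.reg .rsp).toNat := rfl
      rw [em, ec, eC]
      simp only [List.mem_cons, List.mem_nil_iff, or_false] at hw
      unfold OKSpan
      rcases hw with rfl | rfl | rfl | rfl <;> simp only [] <;> omega
    have hun : ShadowUntouched v.mem s_1162e9r.mem := by v_untouched
    have hbits : Bits (g.Blk A) g.len s_1162e9r.mem g.f := by
      apply hpt.bits_keep hs
      intro w hw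
      simp only [List.mem_cons, List.mem_nil_iff, or_false] at hw
      rcases hw with rfl | rfl | rfl | rfl <;> simp only [] <;> omega
    have hmx' : s_1162e9r.mxcsr &&& 0x1F80 = 0x1F80 := by
      rw [w_mxcsr]
      exact hmx
    have hpt' : Pt u₀ g Vorbis.L.start_decoder.ret483 i A7 A7c Ai A k s_1162e9r := by
      apply hpt.carry w_rip _ _ _ w_eq (abiInv_of w_df_1162e9 hmx') hs hws hun hbits
      · rw [w_rsp, ← e_rsp]
        exact hf.rsp
      · rw [w_kept .rbp rfl]
        exact e_rbp
      · exact w_kept .rbx rfl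
    obtain ⟨q1, q2, q3, q4, q5⟩ := hpt.fields_eq hs hws
    have hmg : mg < 256 := by
      rw [← emg]
      exact Mem.readLE_lt _ _ 1
    obtain ⟨b1, b2⟩ := byte_round mg hmg
    refine ReachVia.done ⟨⟨hpt', ?_, hlt, ?_⟩, mg, ⟨?_, ?_, hmg, ?_, ?_⟩⟩
    · rw [w_kept .r13 rfl]
      exact e_r13
    · unfold stepsOf
      rw [q1, q3, em]
      exact hsteps
    · rw [em] at q2
      rw [q1, em, q2, ec, w_r12, addr_add_addr]
    · rw [em] at q2
      rw [q1, em, q2, ec]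
      have heq : Mem.EqOn (3 * k + c) (3 * k + c + 1) v.mem s_1162e9r.mem := by
        apply hs.eqOn
        intro w hw
        simp only [List.mem_cons, List.mem_nil_iff, or_false] at hw
        rcases hw with rfl | rfl | rfl | rfl <;> simp only [] <;> omega
      rw [heq.readLE (addr (3 * k + c)) 1 (by omega) (by omega) (by omega)]
      exact emg
    · rw [w_mem]
      u_read
    · rw [w_mem]
      u_read

/-- `Bits f` after stores of the segment that go off `*f` or into `f->error` (`[f + 136, f + 144)`). -/
theorem Pt.bits_keep_err {u₀ : State} {g : Ghost} {pc : Word} {i : Nat} {A7 A7c Ai : Arena} {A : Arena × List Obj} {k : Nat} {v : State}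
    (h : Pt u₀ g pc i A7 A7c Ai A k v) {ws : List Span} {mem' : Mem} (hs : Mem.SameExcept ws v.mem mem')
    (hoff : ∀ w, w ∈ ws → w.hi ≤ g.f ∨ g.f + 1808 ≤ w.lo ∨ (g.f + 136 ≤ w.lo ∧ w.hi ≤ g.f + 144)) :
    Bits (g.Blk A) g.len mem' g.f := by
  apply h.loop.mid.bits.frame_fields
  apply Bits.SameFields.of_sameExcept hs
  · intro w hw
    have := hoff w hw
    omega
  · intro w hw
    have := hoff w hw
    omega
  · intro w hw
    have := hoff w hw
    omega
  · intro w hw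
    have := hoff w hw
    omega

/-- **An error exit of the segment, at the epilogue** (`mov esi, 14H ; mov rdi, rbp ; call error ; jmp 113b22`): the state `x` at
0x113b22 differs from the state `v` of the assertion by the callee's stack and `f->error`; eax = 0: `AtERR`. -/
theorem Pt.err_exit {u₀ : State} {g : Ghost} {pc : Word} {i : Nat} {A7 A7c Ai : Arena} {A : Arena × List Obj} {k : Nat} {v : State}
    (h : Pt u₀ g pc i A7 A7c Ai A k v) {x : State}
    (hrip : x.rip = pc_ERR) (hrsp : x.reg .rsp = addr g.R) (hrbp : x.reg .rbp = addr g.f) (hrbx : x.reg .rbx = v.reg .rbx)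
    (hcode : CodeOK u₀ x.mem) (hinv : abiInv x)
    (hs : Mem.SameExcept [⟨(g.e.reg .rsp).toNat - 1888, (g.e.reg .rsp).toNat - 1480⟩, ⟨g.f + 140, g.f + 144⟩] v.mem x.mem)
    (hun : ShadowUntouched v.mem x.mem) (hax : (x.reg .rax).toNat % 2 ^ 32 = 0) : AtERR u₀ g x := by
  obtain ⟨hg1, hg2, hg3, hg4⟩ := h.geom
  obtain ⟨hf1, hf2, hf3⟩ := h.f_where
  have e2 : g.RA = (g.e.reg .rsp).toNat := rfl
  have hws : ∀ w, w ∈ [(⟨(g.e.reg .rsp).toNat - 1888, (g.e.reg .rsp).toNat - 1480⟩ : Span), ⟨g.f + 140, g.f + 144⟩] →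
      OKSpan g (Mapping.chan v.mem (mapAt g v.mem i)) k (nchan v.mem g.f) w := by
    intro w hw
    simp only [List.mem_cons, List.mem_nil_iff, or_false] at hw
    unfold OKSpan
    rcases hw with rfl | rfl <;> simp only [] <;> omega
  have hbits : Bits (g.Blk A) g.len x.mem g.f := by
    apply h.bits_keep_err hs
    intro w hw
    simp only [List.mem_cons, List.mem_nil_iff, or_false] at hw
    rcases hw with rfl | rfl <;> simp only [] <;> omega
  have hpt' : Pt u₀ g pc_ERR i A7 A7c Ai A k x := h.carry hrip hrsp hrbp hrbx hcode hinv hs hws hun hbits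
  exact hpt'.toERR hax

/-- The signed value of a small 32-bit number. -/
theorem toInt_ofNat32_small (n : Nat) (h : n < 2 ^ 31) : (BitVec.ofNat 32 n).toInt = (n : Int) := by
  have h1 : (BitVec.ofNat 32 n).toNat = n := by
    rw [BitVec.toNat_ofNat]
    omega
  rw [BitVec.toInt_eq_toNat_cond, h1]
  split <;> omega

/-- The signed value of a byte after `movzx`. -/
theorem toInt_byte_round (an : Nat) (h : an < 256) :
    (BitVec.zeroExtend 32 (BitVec.setWidth 8 (BitVec.zeroExtend 32 (BitVec.ofNat 8 an)))).toInt = (an : Int) := by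
  have h1 := (byte_round an h).2
  rw [BitVec.toInt_eq_toNat_cond, h1]
  split <;> omega

/-- **Part 3b of one round** (0x1162ee … the head 0x116351, or the epilogue 0x113b22; stb_vorbis_fixed.c:4113 – 4115, 4110): the
three tests `magnitude < C` (`jl`), `angle < C` (`jg`; check site load1 `chan + 3k + 1`), `magnitude ≠ angle` (`jne`); each failure is
`error(f, VORBIS_invalid_setup) ; jmp 113b22` = `AtERR`; when all pass, `++k` and MP4 holds for step `k` (`Pt.succ`). -/
theorem part3b (Lay : Layout) (hLay : Lay.hi = 0x1000000) (μ : Microarch) (hμ : UserX.MicroOK μ) (u₀ : State)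
    (hcode : HasCodeNat Lay u₀ Vorbis.L.start_decoder.entry Vorbis.Code.code_start_decoder.nat Vorbis.L.start_decoder.size)
    (h_load1 : Asan.SmallCheck Lay μ Vorbis.WayInv (Vorbis.CodeOK u₀) [.rax, .rdx] 1 Vorbis.L.__asan_load1_noabort.entry)
    (h_error : ∀ (others : List Obj) (frames : List (Nat × FrameLayout)), Calls Lay μ Vorbis.WayInv (Vorbis.conv u₀) Vorbis.L.error.entry (Vorbis.Spec.error.spec others frames))
    (g : Ghost) (i : Nat) (A7 A7c Ai : Arena) (A : Arena × List Obj) (k : Nat) (v : State)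
    (S mg : Nat) (hrd : Round u₀ g Vorbis.L.start_decoder.ret483 i A7 A7c Ai A k S v) (hts : Tests g i k mg v) :
    ReachVia Lay μ WayInv v (fun w => AtERR u₀ g w ∨
      (Pt u₀ g Vorbis.L.start_decoder.loop37 i A7 A7c Ai A (k + 1) w ∧ w.reg .r13 = addr (k + 1) ∧ stepsOf g i w = S)) := by
  obtain ⟨hpt, hr13, hlt, hsteps⟩ := hrd
  obtain ⟨hr12, hmag, hmg, h18, h30⟩ := hts
  have hf := hpt.loop.frame
  have he := hf.entry
  v_entry he
  simp only [depth] at he_room he_stack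
  obtain ⟨⟨hR, hR8, hRlo, hRhi⟩, ⟨hf1, hf2, hf3⟩, ⟨hm1, hm2, hm3, hm4⟩, ⟨hc1, hc2, hc3, hc4, hc5⟩, hC1, hC16, hS1, hSC, hkS⟩ :=
    hpt.where_
  unfold stepsOf at hsteps
  have herr := h_error A.2 g.frames'
  have e_rbx := hpt.rbx
  have hu : v.mem.u32 (g.f + 4) = nchan v.mem g.f := by
    have hhd := hpt.loop.mid.header.HD1
    rw [nchan_def]
    simp only [vacc, voff] at hhd ⊢
    exact Mem.u32_of_i32_nonneg _ _ (by omega)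
  obtain ⟨m, em⟩ : ∃ m, mapAt g v.mem i = m := ⟨_, rfl⟩
  rw [em] at hm1 hm2 hm3 hm4 hc1 hc2 hc3 hc4 hc5 hS1 hSC hkS e_rbx hsteps hr12 hmag
  obtain ⟨c, ec⟩ : ∃ c, Mapping.chan v.mem m = c := ⟨_, rfl⟩
  rw [ec] at hc1 hc2 hc3 hc4 hc5 hr12 hmag
  have eS := hsteps
  rw [eS] at hS1 hSC hkS
  obtain ⟨C, eC⟩ : ∃ C, nchan v.mem g.f = C := ⟨_, rfl⟩
  rw [eC] at hc2 hc3 hc4 hc5 hC1 hC16 hSC hu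
  obtain ⟨an, ean⟩ : ∃ an, v.mem.readLE (addr (3 * k + c) + 1) 1 = an := ⟨_, rfl⟩
  have han : an < 256 := by
    rw [← ean]
    exact Mem.readLE_lt _ _ 1
  have w_rip := hf.rip
  have e_rsp : v.reg .rsp = g.e.reg .rsp - 1480 := by
    rw [hf.rsp]
    apply UInt64.toNat_inj.mp
    rw [toNat_addr _ (by omega)]
    u_omega
  have e_rbp := hpt.loop.rbp
  have e_r13 := hr13
  have e_r12 := hr12
  have t3 : (addr (3 * k + c)).toNat = 3 * k + c := toNat_addr _ (by omega)
  have r_chan : v.mem.readLE (addr g.f + 4) 4 = C := by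
    rw [← hu]
    unfold Mem.u32
    rw [← addr_add_lit]
  have tf : (addr g.f).toNat = g.f := toNat_addr _ (by omega)
  have tm : (addr m).toNat = m := toNat_addr _ (by omega)
  have tc : (addr c).toNat = c := toNat_addr _ (by omega)
  have tk : (addr k).toNat = k := toNat_addr _ (by omega)
  have hasF : Lay.Has (addr g.f) 1808 := by
    apply has_addr Lay _ _ (by omega)
    · unfold Layout.lo
      omega
    · rw [hLay]
      omega
  have w_eq : Mem.EqOn Vorbis.L.textLo Vorbis.L.textHi u₀.mem v.mem := hf.code
  have hdf : v.flags .df = false := (show abiInv _ from hf.inv).1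
  have hmx : v.mxcsr &&& 0x1F80 = 0x1F80 := (show abiInv _ from hf.inv).2
  have hsse := Vorbis.sseOK_of_abiInv hf.inv
  u_walk hcode [hμ.vendor] until [Vorbis.L.start_decoder.loop37, Vorbis.L.start_decoder.cut4] span [Vorbis.L.textLo, Vorbis.L.textHi] side (v_side)
  case check_116310 =>
    -- 0x116310: the check of the load `chan[k].angle` (load1 at chan + 3k + 1)
    have hun : ShadowUntouched v.mem s_116310.mem := by v_untouched
    have hs := hpt.site_chan k 1 (by omega) (by omega)
    rw [em, ec] at hs
    exact Vorbis.Spec.check_site hf.shadow hun hs (by u_omega)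
  case call_inv => v_inv
  case pre_116343 =>
    have hun : ShadowUntouched v.mem s_116343.mem := by v_untouched
    refine ⟨shadowPre_call hf (by rw [w_rsp]; u_omega) hun, ?_⟩
    rw [w_rdi, tf]
    exact hpt.loop.hand.obj.mono (frames'_sub g A.2)
  case call_inv => v_inv
  case pre_11632b =>
    have hun : ShadowUntouched v.mem s_11632b.mem := by v_untouched
    refine ⟨shadowPre_call hf (by rw [w_rsp]; u_omega) hun, ?_⟩
    rw [w_rdi, tf]
    exact hpt.loop.hand.obj.mono (frames'_sub g A.2)
  case call_inv => v_inv
  case pre_116301 =>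
    have hun : ShadowUntouched v.mem s_116301.mem := by v_untouched
    refine ⟨shadowPre_call hf (by rw [w_rsp]; u_omega) hun, ?_⟩
    rw [w_rdi, tf]
    exact hpt.loop.hand.obj.mono (frames'_sub g A.2)
  case cont =>
    -- 0x11634d `add r13d, 1` → the head 0x116351 with k + 1: the three tests passed
    have hcoup : Mapping.CouplingOK v.mem g.f (mapAt g v.mem i) k := by
      rw [toInt_ofNat32_small mg (by omega), toInt_ofNat32_small C (by omega)] at hbr_1162f7
      rw [toInt_byte_round an han, toInt_ofNat32_small C (by omega)] at hbr_116321
      rw [(byte_round an han).1] at hbr_116339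
      unfold Mapping.CouplingOK
      simp only [MappingChannel.magnitude, MappingChannel.angle, Mapping.chan_at, voff]
      have e0 : v.mem.u8 (Mapping.chan v.mem (mapAt g v.mem i) + 3 * k + 0) = mg := by
        rw [em, ec]
        unfold Mem.u8
        have ea : c + 3 * k + 0 = 3 * k + c := by omega
        rw [ea]
        exact hmag
      have e1 : v.mem.u8 (Mapping.chan v.mem (mapAt g v.mem i) + 3 * k + 1) = an := by
        rw [em, ec]
        unfold Mem.u8
        have ea : c + 3 * k + 1 = 3 * k + c + 1 := by omega
        rw [ea, ← addr_add_lit]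
        exact ean
      have ech : stb_vorbis.channels v.mem g.f = (C : Int) := by
        simp only [vacc, voff]
        rw [Mem.i32_of_u32_lt _ _ (by rw [hu]; omega), hu]
      rw [e0, e1, ech]
      have hmm : mg % 256 = mg := Nat.mod_eq_of_lt hmg
      rw [hmm] at hbr_116339
      exact ⟨by omega, by omega, hbr_116339⟩
    have hpt1 : Pt u₀ g Vorbis.L.start_decoder.ret483 i A7 A7c Ai A (k + 1) v := by
      apply hpt.succ _ hcoup
      rw [em, eS]
      exact hlt
    have hs : Mem.SameExcept [⟨(g.e.reg .rsp).toNat - 1488, (g.e.reg .rsp).toNat - 1480⟩] v.mem s_11634d.mem := by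
      rw [w_mem]
      u_same
    have hws : ∀ w, w ∈ [(⟨(g.e.reg .rsp).toNat - 1488, (g.e.reg .rsp).toNat - 1480⟩ : Span)] →
        OKSpan g (Mapping.chan v.mem (mapAt g v.mem i)) (k + 1) (nchan v.mem g.f) w := by
      intro w hw
      rw [List.mem_singleton.mp hw]
      unfold OKSpan
      left
      show g.RA - 1888 ≤ (g.e.reg .rsp).toNat - 1488 ∧ (g.e.reg .rsp).toNat - 1480 ≤ g.R
      have e2 : g.RA = (g.e.reg .rsp).toNat := rfl
      omega
    have hun : ShadowUntouched v.mem s_11634d.mem := by v_untouched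
    have hbits : Bits (g.Blk A) g.len s_11634d.mem g.f := by
      apply hpt.bits_keep hs
      intro w hw
      rw [List.mem_singleton.mp hw]
      simp only []
      omega
    have hdf' : s_11634d.flags .df = false := by
      rw [w_flags]
      simp only [X86.User.df_setStatus]
      exact w_df_116310
    have hmx' : s_11634d.mxcsr &&& 0x1F80 = 0x1F80 := by
      rw [w_mxcsr]
      exact hmx
    have hpt' : Pt u₀ g Vorbis.L.start_decoder.loop37 i A7 A7c Ai A (k + 1) s_11634d := by
      apply hpt1.carry w_rip _ _ _ w_eq (abiInv_of hdf' hmx') hs hws hun hbits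
      · rw [w_rsp, ← e_rsp]
        exact hf.rsp
      · rw [w_kept .rbp rfl]
        exact e_rbp
      · exact w_kept .rbx rfl
    obtain ⟨q1, q2, q3, q4, q5⟩ := hpt1.fields_eq hs hws
    refine ReachVia.done (Or.inr ⟨hpt', ?_, ?_⟩)
    · rw [w_r13]
      exact cnt32_succ k (by omega)
    · unfold stepsOf
      rw [q1, q3, em]
      exact hsteps
  case cont =>
    -- the error exit of line 4115: the returned state of `error` (eax = 0), then `jmp 113b22`
    have w_rax : s_116343r.reg .rax = 0 := w_post.1
    v_after_call w_rsp_116343 w_mem_116343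
    simp only [w_rdi_116343, tf] at w_same
    u_walk hcode [hμ.vendor] until [Vorbis.L.start_decoder.loop37, Vorbis.L.start_decoder.cut4] span [Vorbis.L.textLo, Vorbis.L.textHi] side (v_side)
    have hs : Mem.SameExcept [⟨(g.e.reg .rsp).toNat - 1888, (g.e.reg .rsp).toNat - 1480⟩, ⟨g.f + 140, g.f + 144⟩]
        v.mem s_116348.mem := by
      rw [w_mem]
      u_same
    have hun : ShadowUntouched v.mem s_116348.mem := by v_untouched
    have hdf' : s_116348.flags .df = false := by
      rw [w_flags]
      exact w_df
    have hmx' : s_116348.mxcsr &&& 0x1F80 = 0x1F80 := by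
      rw [w_mxcsr]
      exact w_mx
    refine ReachVia.done (Or.inl (hpt.err_exit w_rip ?_ ?_ ?_ w_eq (abiInv_of hdf' hmx') hs hun ?_))
    · rw [w_rsp, ← e_rsp]
      exact hf.rsp
    · rw [w_kept .rbp rfl]
      exact e_rbp
    · exact w_kept .rbx rfl
    · rw [w_rax]
      rfl
  case cont =>
    -- the error exit of line 4114: the returned state of `error` (eax = 0), then `jmp 113b22`
    have w_rax : s_11632br.reg .rax = 0 := w_post.1
    v_after_call w_rsp_11632b w_mem_11632b
    simp only [w_rdi_11632b, tf] at w_same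
    u_walk hcode [hμ.vendor] until [Vorbis.L.start_decoder.loop37, Vorbis.L.start_decoder.cut4] span [Vorbis.L.textLo, Vorbis.L.textHi] side (v_side)
    have hs : Mem.SameExcept [⟨(g.e.reg .rsp).toNat - 1888, (g.e.reg .rsp).toNat - 1480⟩, ⟨g.f + 140, g.f + 144⟩]
        v.mem s_116330.mem := by
      rw [w_mem]
      u_same
    have hun : ShadowUntouched v.mem s_116330.mem := by v_untouched
    have hdf' : s_116330.flags .df = false := by
      rw [w_flags]
      exact w_df
    have hmx' : s_116330.mxcsr &&& 0x1F80 = 0x1F80 := by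
      rw [w_mxcsr]
      exact w_mx
    refine ReachVia.done (Or.inl (hpt.err_exit w_rip ?_ ?_ ?_ w_eq (abiInv_of hdf' hmx') hs hun ?_))
    · rw [w_rsp, ← e_rsp]
      exact hf.rsp
    · rw [w_kept .rbp rfl]
      exact e_rbp
    · exact w_kept .rbx rfl
    · rw [w_rax]
      rfl
  case cont =>
    -- the error exit of line 4113: the returned state of `error` (eax = 0), then `jmp 113b22`
    have w_rax : s_116301r.reg .rax = 0 := w_post.1
    v_after_call w_rsp_116301 w_mem_116301
    simp only [w_rdi_116301, tf] at w_same
    u_walk hcode [hμ.vendor] until [Vorbis.L.start_decoder.loop37, Vorbis.L.start_decoder.cut4] span [Vorbis.L.textLo, Vorbis.L.textHi] side (v_side)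
    have hs : Mem.SameExcept [⟨(g.e.reg .rsp).toNat - 1888, (g.e.reg .rsp).toNat - 1480⟩, ⟨g.f + 140, g.f + 144⟩]
        v.mem s_116306.mem := by
      rw [w_mem]
      u_same
    have hun : ShadowUntouched v.mem s_116306.mem := by v_untouched
    have hdf' : s_116306.flags .df = false := by
      rw [w_flags]
      exact w_df
    have hmx' : s_116306.mxcsr &&& 0x1F80 = 0x1F80 := by
      rw [w_mxcsr]
      exact w_mx
    refine ReachVia.done (Or.inl (hpt.err_exit w_rip ?_ ?_ ?_ w_eq (abiInv_of hdf' hmx') hs hun ?_))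
    · rw [w_rsp, ← e_rsp]
      exact hf.rsp
    · rw [w_kept .rbp rfl]
      exact e_rbp
    · exact w_kept .rbx rfl
    · rw [w_rax]
      rfl

/-! ### The composition -/

/-- **THE SEGMENT**: the entry walk, then `ReachVia.loop` over one round = `part1` (loop test, `ilog`, `get_bits`), `part2a`,
`part2b`, `part3a`, `part3b`; the invariant at the head 0x116351 is `Pt … k` with `r13d = k` and `coupling_steps = S`, the measure
`S − r13`. -/
theorem seg_r10 (Lay : Layout) (hLay : Lay.hi = 0x1000000) (μ : Microarch) (hμ : UserX.MicroOK μ) (u₀ : State)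
    (hcode : HasCodeNat Lay u₀ Vorbis.L.start_decoder.entry Vorbis.Code.code_start_decoder.nat Vorbis.L.start_decoder.size)
    (h_ilog : ∀ (others : List Obj) (frames : List (Nat × FrameLayout)), Calls Lay μ Vorbis.WayInv (Vorbis.conv u₀) Vorbis.L.ilog.entry (Vorbis.Spec.ilog.spec others frames))
    (h_get_bits : ∀ (others : List Obj) (frames : List (Nat × FrameLayout)) (Blk : Block → Prop) (len : Nat), Calls Lay μ Vorbis.WayInv (Vorbis.conv u₀) Vorbis.L.get_bits.entry (Vorbis.Spec.get_bits.spec others frames Blk len))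
    (h_load8 : Asan.SmallCheck Lay μ Vorbis.WayInv (Vorbis.CodeOK u₀) [.rax, .rcx, .rdx] 8 Vorbis.L.__asan_load8_noabort.entry)
    (h_store1 : Asan.SmallCheck Lay μ Vorbis.WayInv (Vorbis.CodeOK u₀) [.rax, .rdx] 1 Vorbis.L.__asan_store1_noabort.entry)
    (h_load4 : Asan.SmallCheck Lay μ Vorbis.WayInv (Vorbis.CodeOK u₀) [.rax, .rcx, .rdx] 4 Vorbis.L.__asan_load4_noabort.entry)
    (h_load1 : Asan.SmallCheck Lay μ Vorbis.WayInv (Vorbis.CodeOK u₀) [.rax, .rdx] 1 Vorbis.L.__asan_load1_noabort.entry)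
    (h_error : ∀ (others : List Obj) (frames : List (Nat × FrameLayout)), Calls Lay μ Vorbis.WayInv (Vorbis.conv u₀) Vorbis.L.error.entry (Vorbis.Spec.error.spec others frames)) :
    Vorbis.Spec.StartDecoder.SegR10 Lay μ u₀ := by
  intro g i v hat
  obtain ⟨A7, A7c, Ai, A, hb⟩ := hat
  -- 0x116380: k = 0, to the head
  refine (seg_entry Lay hLay μ hμ u₀ hcode g i A7 A7c Ai A v hb).trans ?_
  intro w hw
  obtain ⟨hpt, hr⟩ := hw
  obtain ⟨S, hS⟩ : ∃ S, stepsOf g i w = S := ⟨_, rfl⟩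
  refine ReachVia.loop (Inv := fun x => ∃ k, Pt u₀ g Vorbis.L.start_decoder.loop37 i A7 A7c Ai A k x ∧ x.reg .r13 = addr k ∧
      stepsOf g i x = S) (fun x => S - (x.reg .r13).toNat) ?_ w ⟨0, hpt, hr, hS⟩
  intro x hx
  obtain ⟨k, hp, hrx, hSx⟩ := hx
  -- 0x116351: the loop test, ilog, get_bits
  refine (part1 Lay hLay μ hμ u₀ hcode h_ilog h_get_bits g i A7 A7c Ai A k x hp hrx).trans ?_
  intro y hy
  rcases hy with h11 | ⟨hp1, hr1, hlt1, hS1⟩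
  · exact ReachVia.done (Or.inl (Or.inl h11))
  · have hSy : stepsOf g i y = S := hS1.trans hSx
    have hltS : k < S := by
      rw [← hSy]
      exact hlt1
    have hrd1 : Round u₀ g Vorbis.L.start_decoder.cut290 i A7 A7c Ai A k S y := ⟨hp1, hr1, hltS, hSy⟩
    -- 0x116248: the magnitude is stored
    refine (part2a Lay hLay μ hμ u₀ hcode h_load8 h_store1 h_load4 g i A7 A7c Ai A k y S hrd1).trans ?_
    intro z hz
    obtain ⟨hrd2, hsp2⟩ := hz
    -- 0x11628c: ilog, get_bits
    refine (part2b Lay hLay μ hμ u₀ hcode h_ilog h_get_bits g i A7 A7c Ai A k z S hrd2 hsp2).trans ?_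
    intro z' hz'
    obtain ⟨hrd3, hsp3⟩ := hz'
    -- 0x1162a1: the angle is stored, the magnitude read back
    refine (part3a Lay hLay μ hμ u₀ hcode h_load8 h_store1 h_load4 h_load1 g i A7 A7c Ai A k z' S hrd3 hsp3).trans ?_
    intro t ht
    obtain ⟨hrd4, mg, hts⟩ := ht
    -- 0x1162ee: the three tests
    refine (part3b Lay hLay μ hμ u₀ hcode h_load1 h_error g i A7 A7c Ai A k t S mg hrd4 hts).trans ?_
    intro t' ht'
    rcases ht' with herr | ⟨hp5, hr5, hS5⟩
    · exact ReachVia.done (Or.inl (Or.inr herr))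
    · refine ReachVia.done (Or.inr ⟨⟨k + 1, hp5, hr5, hS5⟩, ?_⟩)
      have hk16 : k < 16 := by
        obtain ⟨_, _, _, _, _, h16, _, hSC, _⟩ := hp1.where_
        omega
      show S - (t'.reg .r13).toNat < S - (x.reg .r13).toNat
      rw [hr5, hrx, toNat_addr _ (by omega), toNat_addr _ (by omega)]
      omega

end Vorbis.Spec.start_decoder_R10
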